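-- pv_equiv track=rewrite | github.com/MyTypistMVP/backend | app/services/user_template_upload_service.py | _generate_display_name
-- ===== SOURCE A (Python) =====
-- def _generate_display_name(name: str) -> str:
--     """Generate human-readable display name"""
--     # Convert snake_case to Title Case
--     display_name = name.replace('_', ' ').title()
--
--     # Handle common abbreviations
--     replacements = {
--         'Id': 'ID',
--         'Url': 'URL',
--         'Api': 'API',
--         'Dob': 'Date of Birth',
--         'Ssn': 'SSN'
--     }
--
--     for old, new in replacements.items():
--         display_name = display_name.replace(old, new)
--
--     return display_name
-- ===== SOURCE B (Python) =====
-- def _generate_display_name(name: str) -> str: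
--     """Generate human-readable display name (single left-to-right pass)."""
--     out = []
--     i = 0
--     n = len(name)
--     prev_alpha = False
--     while i < n:
--         c = ' ' if name[i] == '_' else name[i]
--         if not c.isalpha():
--             out.append(c)
--             prev_alpha = False
--             i += 1
--         elif prev_alpha:
--             out.append(c.lower())
--             i += 1
--         else:
--             chunk = name[i:i + 3].lower()
--             if chunk.startswith('id'):
--                 out.append('ID'); i += 2
--             elif chunk.startswith('url'):
--                 out.append('URL'); i += 3
--             elif chunk.startswith('api'):
--                 out.append('API'); i += 3
--             elif chunk.startswith('dob'):
--                 out.append('Date of Birth'); i += 3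
--             elif chunk.startswith('ssn'):
--                 out.append('SSN'); i += 3
--             else:
--                 out.append(c.upper()); i += 1
--             prev_alpha = True
--     return ''.join(out)
-- ===== Notes on version B (the rewrite author's own statement) =====
-- stated objective: alternative
-- what changed: replaces title() followed by five sequential whole-string str.replace passes with a single left-to-right scan that title-cases and substitutes the abbreviations at alphabetic-run starts in one pass
-- intended difference: on names containing 'idob' (case-insensitively) at the start of an alphabetic run, A's sequential replaces cascade ('Id'->'ID' creates a fresh 'Dob' match) so A returns e.g. 'IDate of Birth' for 'idob', while B returns 'IDob', the intended title-cased name with the 'id' abbreviation expanded once — e.g. on _generate_display_name("idob"): A returns "IDate of Birth", B returns "IDob"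
import Mathlib
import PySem

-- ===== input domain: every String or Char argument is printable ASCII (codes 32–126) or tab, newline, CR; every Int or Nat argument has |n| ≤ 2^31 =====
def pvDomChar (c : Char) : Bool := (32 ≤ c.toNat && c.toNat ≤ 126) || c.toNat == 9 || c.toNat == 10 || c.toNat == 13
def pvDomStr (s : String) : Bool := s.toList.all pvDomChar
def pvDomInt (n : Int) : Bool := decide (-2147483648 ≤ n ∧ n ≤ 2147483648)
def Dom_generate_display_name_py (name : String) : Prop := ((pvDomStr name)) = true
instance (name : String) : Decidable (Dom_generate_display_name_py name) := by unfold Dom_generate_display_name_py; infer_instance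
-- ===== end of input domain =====

-- B replaces title() plus five sequential str.replace passes by ONE left-to-right scan that
-- title-cases and substitutes the abbreviations at alphabetic-run starts (alternative, same cost);
-- on run-start "idob" inputs A's Id->ID replacement cascades into the Dob replacement, B does not (see D_).

-- ===== PORT A =====
-- hand port of str.title: exact on the ASCII domain, where 'cased character' = ASCII letter
def pyTitleGo : Bool → List Char → List Char
  | _, [] => []
  | prev, c :: t =>
    (if PySem.Chars.isalpha c then
       (if prev then PySem.Chars.lowerChar c else PySem.Chars.upperChar c)
     else c) :: pyTitleGo (PySem.Chars.isalpha c) t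

def generate_display_name_py (name : String) : String :=
  let display_name := PySem.Str.replace name "_" " "
  let display_name := String.ofList (pyTitleGo false display_name.toList)
  let replacements : List (String × String) :=
    [("Id", "ID"), ("Url", "URL"), ("Api", "API"), ("Dob", "Date of Birth"), ("Ssn", "SSN")]
  replacements.foldl (fun s p => PySem.Str.replace s p.1 p.2) display_name

-- ===== PORT B =====
def scanB : Bool → List Char → List Char
  | _, [] => []
  | prev, c0 :: t =>
    let c := if c0 = '_' then ' ' else c0
    if PySem.Chars.isalpha c = false then c :: scanB false t
    else if prev then PySem.Chars.lowerChar c :: scanB true t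
    else
      let chunk := ((c0 :: t).take 3).map PySem.Chars.lowerChar
      if PySem.Chars.startswith chunk "id".toList then "ID".toList ++ scanB true (t.drop 1)
      else if PySem.Chars.startswith chunk "url".toList then "URL".toList ++ scanB true (t.drop 2)
      else if PySem.Chars.startswith chunk "api".toList then "API".toList ++ scanB true (t.drop 2)
      else if PySem.Chars.startswith chunk "dob".toList then "Date of Birth".toList ++ scanB true (t.drop 2)
      else if PySem.Chars.startswith chunk "ssn".toList then "SSN".toList ++ scanB true (t.drop 2)
      else PySem.Chars.upperChar c :: scanB true t
termination_by _ l => l.length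
decreasing_by all_goals (simp; try omega)

def generate_display_name_py_alt (name : String) : String :=
  String.ofList (scanB false name.toList)

-- ===== PRECONDITION & SPEC =====
-- On inputs containing "idob" (case-insensitive) at the start of an alphabetic run, A's sequential
-- replaces cascade ('Id'->'ID' creates a fresh 'Dob' match) and A returns e.g. 'IDate of Birth' for
-- 'idob'; B returns 'IDob', the intended title-cased name with the 'id' abbreviation expanded once.
-- a single scan of the input keeping the last four characters: some 4-char window spells 'idob'
-- (case-insensitively) and the character just before that window is not a letter
def D_generate_display_name_py (name : String) : Prop :=
  (name.toList.foldl (fun s c =>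
    (s.1 || (((c :: s.2).take 4).reverse.map PySem.Chars.lowerChar == ['i','d','o','b']
       && !PySem.Chars.isalpha (s.2.getD 3 ' ')), (c :: s.2).take 4)) (false, [])).1
instance (name : String) : Decidable (D_generate_display_name_py name) := by
  unfold D_generate_display_name_py; infer_instance

def Spec_generate_display_name_py (name : String) (out : String) : Prop :=
  ¬ D_generate_display_name_py name → out = generate_display_name_py_alt name
instance (name : String) (out : String) : Decidable (Spec_generate_display_name_py name out) := by
  unfold Spec_generate_display_name_py; infer_instance

def pvDiffWitness_generate_display_name_py : String := "idob"
def pvDiffWitnessOut_generate_display_name_py : String × String := ("IDate of Birth", "IDob")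

-- ===== CLAIM (what is proved, stated in full; the proofs are below) =====
def Claim_unchanged_generate_display_name_py : Prop := ∀ (name : String), Dom_generate_display_name_py name → Spec_generate_display_name_py name (generate_display_name_py name)
def Claim_exact_generate_display_name_py : Prop := ∀ (name : String), Dom_generate_display_name_py name → D_generate_display_name_py name → generate_display_name_py name ≠ generate_display_name_py_alt name
def Claim_changed_generate_display_name_py : Prop := Dom_generate_display_name_py (pvDiffWitness_generate_display_name_py) ∧ D_generate_display_name_py (pvDiffWitness_generate_display_name_py) ∧ generate_display_name_py (pvDiffWitness_generate_display_name_py) = pvDiffWitnessOut_generate_display_name_py.1 ∧ generate_display_name_py_alt (pvDiffWitness_generate_display_name_py) = pvDiffWitnessOut_generate_display_name_py.2 ∧ pvDiffWitnessOut_generate_display_name_py.1 ≠ pvDiffWitnessOut_generate_display_name_py.2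

-- ===== LEMMAS AND PROOFS =====

-- leftmost non-overlapping replace, structurally (proof-side model of PySem.Chars.replace)
def repl (old new : List Char) : List Char → List Char
  | [] => []
  | c :: t =>
    if old.isPrefixOf (c :: t) then new ++ repl old new (t.drop (old.length - 1))
    else c :: repl old new t
termination_by l => l.length
decreasing_by all_goals (simp; try omega)

def substChar (c : Char) : Char := if c = '_' then ' ' else c

-- proof-side recursive form of the D_ matcher
def hasIdob : Bool → List Char → Bool
  | _, [] => false
  | prevAlpha, c :: t =>
    (!prevAlpha && (((c :: t).take 4).map PySem.Chars.lowerChar == ['i','d','o','b']))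
      || hasIdob (PySem.Chars.isalpha c) t

theorem hasIdob_short : ∀ (l : List Char) (p : Bool), l.length ≤ 3 → hasIdob p l = false := by
  intro l
  induction l with
  | nil => intro p _; rfl
  | cons c t ih =>
    intro p hl
    rw [hasIdob]
    have hX : (((c :: t).take 4).map PySem.Chars.lowerChar) ≠ ['i','d','o','b'] := by
      intro h
      have := congrArg List.length h
      simp at this
      simp at hl
      omega
    rw [beq_eq_false_iff_ne.mpr hX]
    simp [ih (PySem.Chars.isalpha c) (by simp at hl ⊢; omega)]

-- proof-side recursion of the D_ fold: w is the reversed last-≤4-characters window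
def G : List Char → List Char → Bool
  | _, [] => false
  | w, c :: t =>
    ((((c :: w).take 4).reverse.map PySem.Chars.lowerChar == ['i','d','o','b'])
       && !PySem.Chars.isalpha (w.getD 3 ' ')) || G ((c :: w).take 4) t

theorem beq_idob_false (m : List Char) (h : m.length ≠ 4) :
    (m == ['i','d','o','b']) = false :=
  beq_eq_false_iff_ne.mpr (fun e => h (by rw [e]; rfl))

theorem foldG : ∀ (l : List Char) (f : Bool) (w : List Char),
    (l.foldl (fun s c =>
      (s.1 || (((c :: s.2).take 4).reverse.map PySem.Chars.lowerChar == ['i','d','o','b']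
         && !PySem.Chars.isalpha (s.2.getD 3 ' ')), (c :: s.2).take 4)) (f, w)).1
    = (f || G w l) := by
  intro l
  induction l with
  | nil => intro f w; simp [G]
  | cons c t ih =>
    intro f w
    rw [List.foldl_cons, ih, G, Bool.or_assoc]

theorem G_align : ∀ (l r : List Char) (x y z : Char),
    G (z :: y :: x :: r) l = hasIdob (PySem.Chars.isalpha (r.headD ' ')) (x :: y :: z :: l) := by
  intro l
  induction l with
  | nil => intro r x y z; rw [hasIdob_short _ _ (by simp)]; rfl
  | cons c t ih =>
    intro r x y z
    rw [G, hasIdob,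
        show (List.take 4 (c :: z :: y :: x :: r) : List Char) = [c, z, y, x] from rfl,
        show (List.take 4 (x :: y :: z :: c :: t) : List Char) = [x, y, z, c] from rfl,
        show ((z :: y :: x :: r).getD 3 ' ') = r.getD 0 ' ' from rfl,
        ih [x] y z c]
    cases r <;> simp [Bool.and_comm]

theorem fold_eq_rec (l : List Char) :
    (l.foldl (fun s c =>
      (s.1 || (((c :: s.2).take 4).reverse.map PySem.Chars.lowerChar == ['i','d','o','b']
         && !PySem.Chars.isalpha (s.2.getD 3 ' ')), (c :: s.2).take 4)) (false, [])).1
    = hasIdob false l := by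
  rw [foldG]
  match l with
  | [] => rfl
  | [c1] =>
    rw [hasIdob_short _ _ (by simp)]
    simp [G, beq_idob_false]
  | [c1, c2] =>
    rw [hasIdob_short _ _ (by simp)]
    simp [G, beq_idob_false]
  | [c1, c2, c3] =>
    rw [hasIdob_short _ _ (by simp)]
    simp [G, beq_idob_false]
  | c1 :: c2 :: c3 :: c4 :: rest =>
    rw [G, G, G,
        show (List.take 4 [c1] : List Char) = [c1] from rfl,
        show (List.take 4 [c2, c1] : List Char) = [c2, c1] from rfl,
        show (List.take 4 [c3, c2, c1] : List Char) = [c3, c2, c1] from rfl,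
        G_align (c4 :: rest) [] c1 c2 c3]
    simp [beq_idob_false, show PySem.Chars.isalpha ' ' = false from by decide]

theorem repl_nil (old new : List Char) : repl old new [] = [] := by
  simp [repl]

theorem repl_cons_not (old new : List Char) (c : Char) (t : List Char)
    (h : old.isPrefixOf (c :: t) = false) :
    repl old new (c :: t) = c :: repl old new t := by
  rw [repl, h]; simp

theorem repl_match (a : Char) (old' new l : List Char) :
    repl (a :: old') new ((a :: old') ++ l) = new ++ repl (a :: old') new l := by
  have hp : (a :: old').isPrefixOf ((a :: old') ++ l) = true :=
    List.isPrefixOf_iff_prefix.mpr (List.prefix_append _ _)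
  rw [show (a :: old') ++ l = a :: (old' ++ l) from rfl]
  rw [repl, show (a :: (old' ++ l)) = (a :: old') ++ l from rfl, hp]
  simp

theorem isPrefixOf_cons_ne (a c : Char) (p t : List Char) (h : c ≠ a) :
    (a :: p).isPrefixOf (c :: t) = false := by
  have hb : (a == c) = false := beq_eq_false_iff_ne.mpr (Ne.symm h)
  simp [List.isPrefixOf, hb]

theorem isPrefixOf_cons_cons (a : Char) (p t : List Char) :
    (a :: p).isPrefixOf (a :: t) = p.isPrefixOf t := by
  simp [List.isPrefixOf]

theorem repl_cons_ne (a : Char) (old' new : List Char) (c : Char) (t : List Char) (h : c ≠ a) :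
    repl (a :: old') new (c :: t) = c :: repl (a :: old') new t :=
  repl_cons_not _ _ _ _ (isPrefixOf_cons_ne a c old' t h)

theorem isPrefixOf_eq_false_of_take_ne (p l : List Char) (h : l.take p.length ≠ p) :
    p.isPrefixOf l = false := by
  cases hb : p.isPrefixOf l with
  | false => rfl
  | true =>
    exact absurd ((List.prefix_iff_eq_take.mp (List.isPrefixOf_iff_prefix.mp hb))).symm h

theorem take2_repl (old new l : List Char) (hh : old.head? = new.head?) (h2 : 2 ≤ old.length)
    (hnp : old.isPrefixOf l = false) :
    (repl old new l).take 2 = l.take 2 := by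
  obtain ⟨o1, o2, orest, rfl⟩ : ∃ o1 o2 orest, old = o1 :: o2 :: orest := by
    match old, h2 with
    | o1 :: o2 :: orest, _ => exact ⟨o1, o2, orest, rfl⟩
  cases l with
  | nil => simp [repl_nil]
  | cons a l' =>
    rw [repl_cons_not _ _ _ _ hnp]
    cases l' with
    | nil => rw [repl_nil]
    | cons b r =>
      have hbr : (repl (o1 :: o2 :: orest) new (b :: r)).take 1 = [b] := by
        rw [repl]
        split
        · next hpre =>
          have hb : o1 = b := by
            obtain ⟨s, hs⟩ := List.isPrefixOf_iff_prefix.mp hpre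
            rw [List.cons_append] at hs
            exact (List.cons.injEq _ _ _ _ ▸ hs).1
          cases new with
          | nil => simp at hh
          | cons n1 nrest =>
            have hn : o1 = n1 := by simpa using hh
            simp [← hn, hb]
        · next => simp
      rw [List.take_succ_cons, List.take_succ_cons, hbr]
      simp

def headNotUpper (l : List Char) : Prop :=
  ∀ c, l.head? = some c → PySem.Chars.isupper c = false

-- char-level facts
theorem isupper_iff (c : Char) : PySem.Chars.isupper c = true ↔ 65 ≤ c.toNat ∧ c.toNat ≤ 90 := by
  unfold PySem.Chars.isupper
  simp only [Bool.and_eq_true, decide_eq_true_eq, Char.le_def, UInt32.le_iff_toNat_le]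
  have h1 : ('A').val.toNat = 65 := by decide
  have h2 : ('Z').val.toNat = 90 := by decide
  rw [h1, h2]
  exact Iff.rfl

theorem islower_iff (c : Char) : PySem.Chars.islower c = true ↔ 97 ≤ c.toNat ∧ c.toNat ≤ 122 := by
  unfold PySem.Chars.islower
  simp only [Bool.and_eq_true, decide_eq_true_eq, Char.le_def, UInt32.le_iff_toNat_le]
  have h1 : ('a').val.toNat = 97 := by decide
  have h2 : ('z').val.toNat = 122 := by decide
  rw [h1, h2]
  exact Iff.rfl

theorem char_eq_of_toNat (a b : Char) (h : a.toNat = b.toNat) : a = b :=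
  Char.ext (UInt32.toNat_inj.mp h)

theorem toNat_ofNat_valid (n : Nat) (h : n < 55296) : (Char.ofNat n).toNat = n := by
  have hv : n.isValidChar := Or.inl h
  rw [Char.ofNat, dif_pos hv]
  rfl

theorem bool_eq_false_of_not {b : Bool} (h : ¬ b = true) : b = false := by
  cases b <;> simp_all

theorem lowerChar_eq_lit (x c C : Char) (h1 : PySem.Chars.islower c = true)
    (h2 : PySem.Chars.isupper C = true) (h3 : C.toNat + 32 = c.toNat)
    (h : PySem.Chars.lowerChar x = c) : x = c ∨ x = C := by
  unfold PySem.Chars.lowerChar at h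
  split at h
  · next hu =>
    right
    have hb := isupper_iff x |>.mp hu
    have hval : (Char.ofNat (x.toNat + 32)).toNat = x.toNat + 32 :=
      toNat_ofNat_valid _ (by omega)
    have hc := congrArg Char.toNat h
    rw [hval] at hc
    exact char_eq_of_toNat _ _ (by omega)
  · left; exact h

theorem isalpha_of_islower (x : Char) (h : PySem.Chars.islower x = true) :
    PySem.Chars.isalpha x = true := by
  unfold PySem.Chars.isalpha
  simp [h]

theorem isalpha_of_isupper (x : Char) (h : PySem.Chars.isupper x = true) :
    PySem.Chars.isalpha x = true := by
  unfold PySem.Chars.isalpha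
  simp [h]

theorem islower_of_alpha_not_upper (x : Char) (ha : PySem.Chars.isalpha x = true)
    (hu : PySem.Chars.isupper x = false) : PySem.Chars.islower x = true := by
  unfold PySem.Chars.isalpha at ha
  rw [hu] at ha
  simpa using ha

theorem upperChar_of_lowerChar (x c C : Char) (h1 : PySem.Chars.islower c = true)
    (h2 : PySem.Chars.isupper C = true) (h3 : C.toNat + 32 = c.toNat)
    (h : PySem.Chars.lowerChar x = c) : PySem.Chars.upperChar x = C := by
  rcases lowerChar_eq_lit x c C h1 h2 h3 h with rfl | rfl
  · unfold PySem.Chars.upperChar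
    rw [if_pos h1]
    have hn : x.toNat - 32 = C.toNat := by
      have := islower_iff x |>.mp h1
      omega
    rw [hn, Char.ofNat_toNat]
  · unfold PySem.Chars.upperChar
    have hl : PySem.Chars.islower x = false := by
      apply bool_eq_false_of_not
      intro hc
      have := islower_iff x |>.mp hc
      have := isupper_iff x |>.mp h2
      omega
    rw [hl]
    simp

theorem isalpha_of_lowerChar_eq (x c : Char) (h1 : PySem.Chars.islower c = true)
    (h : PySem.Chars.lowerChar x = c) : PySem.Chars.isalpha x = true := by
  unfold PySem.Chars.lowerChar at h
  split at h
  · next hu => exact isalpha_of_isupper x hu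
  · rw [h]; exact isalpha_of_islower c h1

theorem isupper_lowerChar (x : Char) (h : PySem.Chars.isalpha x = true) :
    PySem.Chars.isupper (PySem.Chars.lowerChar x) = false := by
  unfold PySem.Chars.lowerChar
  split
  · next hu =>
    apply bool_eq_false_of_not
    intro hc
    have hb := isupper_iff x |>.mp hu
    have hval : (Char.ofNat (x.toNat + 32)).toNat = x.toNat + 32 :=
      toNat_ofNat_valid _ (by omega)
    have hc2 := isupper_iff _ |>.mp hc
    omega
  · next hu =>
    have hl := islower_of_alpha_not_upper x h (bool_eq_false_of_not hu)
    apply bool_eq_false_of_not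
    intro hc
    have := islower_iff x |>.mp hl
    have := isupper_iff x |>.mp hc
    omega

theorem lowerChar_upperChar (x : Char) :
    PySem.Chars.lowerChar (PySem.Chars.upperChar x) = PySem.Chars.lowerChar x := by
  unfold PySem.Chars.upperChar
  split
  · next hl =>
    have hb := islower_iff x |>.mp hl
    have hval : (Char.ofNat (x.toNat - 32)).toNat = x.toNat - 32 :=
      toNat_ofNat_valid _ (by omega)
    unfold PySem.Chars.lowerChar
    have hu1 : PySem.Chars.isupper (Char.ofNat (x.toNat - 32)) = true := by
      rw [isupper_iff, hval]; omega
    have hu2 : PySem.Chars.isupper x = false := by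
      apply bool_eq_false_of_not
      intro hc
      have := isupper_iff x |>.mp hc
      omega
    rw [hu1, hu2, if_pos rfl, if_neg (by simp)]
    apply char_eq_of_toNat
    rw [hval, toNat_ofNat_valid _ (by omega)]
    omega
  · rfl

theorem isupper_false_of_not_alpha (x : Char) (h : PySem.Chars.isalpha x = false) :
    PySem.Chars.isupper x = false := by
  unfold PySem.Chars.isalpha at h
  exact (Bool.or_eq_false_iff.mp h).1

theorem ne_of_isupper_false (c a : Char) (hc : PySem.Chars.isupper c = false)
    (ha : PySem.Chars.isupper a = true) : c ≠ a := by
  intro e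
  rw [e, ha] at hc
  cases hc

theorem substChar_of_lowerChar (x ℓ : Char) (hℓ : PySem.Chars.islower ℓ = true)
    (h : PySem.Chars.lowerChar x = ℓ) : substChar x = x := by
  unfold substChar
  rw [if_neg]
  intro e
  subst e
  rw [show PySem.Chars.lowerChar '_' = '_' from by decide] at h
  subst h
  exact absurd hℓ (by decide)

theorem repl_underscore (s : List Char) :
    repl ['_'] [' '] s = s.map substChar := by
  induction s with
  | nil => simp [repl_nil]
  | cons c t ih =>
    by_cases hc : c = '_'
    · subst hc
      have hp : (['_'] : List Char).isPrefixOf ('_' :: t) = true := by simp [List.isPrefixOf]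
      rw [repl, hp]
      simp [substChar, ih]
    · rw [repl_cons_ne '_' [] [' '] c t hc, ih]
      simp [substChar, hc]

theorem titled_cons_alpha_false (c : Char) (rest : List Char) (ha : PySem.Chars.isalpha c = true) :
    pyTitleGo false (c :: rest) = PySem.Chars.upperChar c :: pyTitleGo true rest := by
  simp [pyTitleGo, ha]

theorem titled_cons_alpha_true (c : Char) (rest : List Char) (ha : PySem.Chars.isalpha c = true) :
    pyTitleGo true (c :: rest) = PySem.Chars.lowerChar c :: pyTitleGo true rest := by
  simp [pyTitleGo, ha]

theorem titled_cons_notalpha (prev : Bool) (c : Char) (rest : List Char)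
    (ha : PySem.Chars.isalpha c = false) :
    pyTitleGo prev (c :: rest) = c :: pyTitleGo false rest := by
  simp [pyTitleGo, ha]

theorem headNotUpper_titleGo_true (l : List Char) : headNotUpper (pyTitleGo true l) := by
  intro c hc
  cases l with
  | nil => simp [pyTitleGo] at hc
  | cons a t =>
    by_cases ha : PySem.Chars.isalpha a = true
    · rw [titled_cons_alpha_true a t ha] at hc
      have : PySem.Chars.lowerChar a = c := by simpa using hc
      rw [← this]
      exact isupper_lowerChar a ha
    · have ha' := bool_eq_false_of_not ha
      rw [titled_cons_notalpha true a t ha'] at hc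
      have : a = c := by simpa using hc
      rw [← this]
      exact isupper_false_of_not_alpha a ha'

theorem prefix_false_of_headNotUpper (a : Char) (p l : List Char)
    (ha : PySem.Chars.isupper a = true) (hl : headNotUpper l) :
    (a :: p).isPrefixOf l = false := by
  cases l with
  | nil => rfl
  | cons x xs =>
    exact isPrefixOf_cons_ne a x p xs (ne_of_isupper_false x a (hl x rfl) ha)

theorem head?_eq_of_take2_eq (l m : List Char) (h : l.take 2 = m.take 2) : l.head? = m.head? := by
  cases l <;> cases m <;> simp_all

theorem headNotUpper_of_take2_eq (l m : List Char) (h : l.take 2 = m.take 2)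
    (hm : headNotUpper m) : headNotUpper l := by
  intro c hc
  apply hm
  rw [← head?_eq_of_take2_eq l m h]
  exact hc

def dateL : List Char := ['D','a','t','e',' ','o','f',' ','B','i','r','t','h']

def R5 (l : List Char) : List Char :=
  repl ['S','s','n'] ['S','S','N']
    (repl ['D','o','b'] dateL
      (repl ['A','p','i'] ['A','P','I']
        (repl ['U','r','l'] ['U','R','L']
          (repl ['I','d'] ['I','D'] l))))

-- the four stage take-2 preservation results
theorem stage1_take2 (X : List Char) (hX : headNotUpper X) :
    (repl ['I','d'] ['I','D'] X).take 2 = X.take 2 :=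
  take2_repl ['I','d'] ['I','D'] X rfl (by simp) (prefix_false_of_headNotUpper 'I' _ X (by decide) hX)

theorem stage2_take2 (X : List Char) (hX : headNotUpper X) :
    (repl ['U','r','l'] ['U','R','L'] (repl ['I','d'] ['I','D'] X)).take 2 = X.take 2 := by
  have h1 := stage1_take2 X hX
  have hX1 := headNotUpper_of_take2_eq _ _ h1 hX
  rw [take2_repl ['U','r','l'] ['U','R','L'] _ rfl (by simp) (prefix_false_of_headNotUpper 'U' _ _ (by decide) hX1), h1]

theorem stage3_take2 (X : List Char) (hX : headNotUpper X) :
    (repl ['A','p','i'] ['A','P','I']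
      (repl ['U','r','l'] ['U','R','L'] (repl ['I','d'] ['I','D'] X))).take 2 = X.take 2 := by
  have h2 := stage2_take2 X hX
  have hX2 := headNotUpper_of_take2_eq _ _ h2 hX
  rw [take2_repl ['A','p','i'] ['A','P','I'] _ rfl (by simp) (prefix_false_of_headNotUpper 'A' _ _ (by decide) hX2), h2]

theorem stage4_take2 (X : List Char) (hX : headNotUpper X) :
    (repl ['D','o','b'] dateL
      (repl ['A','p','i'] ['A','P','I']
        (repl ['U','r','l'] ['U','R','L'] (repl ['I','d'] ['I','D'] X)))).take 2 = X.take 2 := by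
  have h3 := stage3_take2 X hX
  have hX3 := headNotUpper_of_take2_eq _ _ h3 hX
  rw [take2_repl ['D','o','b'] dateL _ rfl (by simp) (prefix_false_of_headNotUpper 'D' _ _ (by decide) hX3), h3]

-- cons-form match equations for the five keys
theorem repl_Id_match (X : List Char) :
    repl ['I','d'] ['I','D'] ('I'::'d'::X) = 'I'::'D':: repl ['I','d'] ['I','D'] X := by
  simpa using repl_match 'I' ['d'] ['I','D'] X

theorem repl_Url_match (X : List Char) :
    repl ['U','r','l'] ['U','R','L'] ('U'::'r'::'l'::X) = 'U'::'R'::'L':: repl ['U','r','l'] ['U','R','L'] X := by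
  simpa using repl_match 'U' ['r','l'] ['U','R','L'] X

theorem repl_Api_match (X : List Char) :
    repl ['A','p','i'] ['A','P','I'] ('A'::'p'::'i'::X) = 'A'::'P'::'I':: repl ['A','p','i'] ['A','P','I'] X := by
  simpa using repl_match 'A' ['p','i'] ['A','P','I'] X

theorem repl_Dob_match (X : List Char) :
    repl ['D','o','b'] dateL ('D'::'o'::'b'::X) = dateL ++ repl ['D','o','b'] dateL X := by
  simpa using repl_match 'D' ['o','b'] dateL X

theorem repl_Ssn_match (X : List Char) :
    repl ['S','s','n'] ['S','S','N'] ('S'::'s'::'n'::X) = 'S'::'S'::'N':: repl ['S','s','n'] ['S','S','N'] X := by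
  simpa using repl_match 'S' ['s','n'] ['S','S','N'] X

theorem R5_cons_notUpper (c : Char) (Y : List Char) (h : PySem.Chars.isupper c = false) :
    R5 (c :: Y) = c :: R5 Y := by
  unfold R5
  rw [repl_cons_ne _ _ _ _ _ (ne_of_isupper_false c 'I' h (by decide)),
      repl_cons_ne _ _ _ _ _ (ne_of_isupper_false c 'U' h (by decide)),
      repl_cons_ne _ _ _ _ _ (ne_of_isupper_false c 'A' h (by decide)),
      repl_cons_ne _ _ _ _ _ (ne_of_isupper_false c 'D' h (by decide)),
      repl_cons_ne _ _ _ _ _ (ne_of_isupper_false c 'S' h (by decide))]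

theorem R5_runstart (c : Char) (X : List Char) (hX : headNotUpper X)
    (hId : c = 'I' → X.take 1 ≠ ['d'])
    (hUrl : c = 'U' → X.take 2 ≠ ['r','l'])
    (hApi : c = 'A' → X.take 2 ≠ ['p','i'])
    (hDob : c = 'D' → X.take 2 ≠ ['o','b'])
    (hSsn : c = 'S' → X.take 2 ≠ ['s','n']) :
    R5 (c :: X) = c :: R5 X := by
  unfold R5
  have p1 : (['I','d'] : List Char).isPrefixOf (c :: X) = false := by
    by_cases hc : c = 'I'
    · subst hc
      rw [isPrefixOf_cons_cons]
      exact isPrefixOf_eq_false_of_take_ne _ _ (hId rfl)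
    · exact isPrefixOf_cons_ne _ _ _ _ hc
  rw [repl_cons_not _ _ _ _ p1]
  have p2 : (['U','r','l'] : List Char).isPrefixOf (c :: repl ['I','d'] ['I','D'] X) = false := by
    by_cases hc : c = 'U'
    · subst hc
      rw [isPrefixOf_cons_cons]
      apply isPrefixOf_eq_false_of_take_ne
      rw [show (['r','l'] : List Char).length = 2 from rfl, stage1_take2 X hX]
      exact hUrl rfl
    · exact isPrefixOf_cons_ne _ _ _ _ hc
  rw [repl_cons_not _ _ _ _ p2]
  have p3 : (['A','p','i'] : List Char).isPrefixOf
      (c :: repl ['U','r','l'] ['U','R','L'] (repl ['I','d'] ['I','D'] X)) = false := by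
    by_cases hc : c = 'A'
    · subst hc
      rw [isPrefixOf_cons_cons]
      apply isPrefixOf_eq_false_of_take_ne
      rw [show (['p','i'] : List Char).length = 2 from rfl, stage2_take2 X hX]
      exact hApi rfl
    · exact isPrefixOf_cons_ne _ _ _ _ hc
  rw [repl_cons_not _ _ _ _ p3]
  have p4 : (['D','o','b'] : List Char).isPrefixOf
      (c :: repl ['A','p','i'] ['A','P','I']
        (repl ['U','r','l'] ['U','R','L'] (repl ['I','d'] ['I','D'] X))) = false := by
    by_cases hc : c = 'D'
    · subst hc
      rw [isPrefixOf_cons_cons]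
      apply isPrefixOf_eq_false_of_take_ne
      rw [show (['o','b'] : List Char).length = 2 from rfl, stage3_take2 X hX]
      exact hDob rfl
    · exact isPrefixOf_cons_ne _ _ _ _ hc
  rw [repl_cons_not _ _ _ _ p4]
  have p5 : (['S','s','n'] : List Char).isPrefixOf
      (c :: repl ['D','o','b'] dateL
        (repl ['A','p','i'] ['A','P','I']
          (repl ['U','r','l'] ['U','R','L'] (repl ['I','d'] ['I','D'] X)))) = false := by
    by_cases hc : c = 'S'
    · subst hc
      rw [isPrefixOf_cons_cons]
      apply isPrefixOf_eq_false_of_take_ne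
      rw [show (['s','n'] : List Char).length = 2 from rfl, stage4_take2 X hX]
      exact hSsn rfl
    · exact isPrefixOf_cons_ne _ _ _ _ hc
  rw [repl_cons_not _ _ _ _ p5]

theorem R5_Id (X : List Char) (hX : headNotUpper X) (hob : X.take 2 ≠ ['o','b']) :
    R5 ('I'::'d'::X) = 'I'::'D':: R5 X := by
  unfold R5
  rw [repl_Id_match]
  rw [repl_cons_ne _ _ _ _ _ (by decide : 'I' ≠ 'U'), repl_cons_ne _ _ _ _ _ (by decide : 'D' ≠ 'U')]
  rw [repl_cons_ne _ _ _ _ _ (by decide : 'I' ≠ 'A'), repl_cons_ne _ _ _ _ _ (by decide : 'D' ≠ 'A')]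
  rw [repl_cons_ne _ _ _ _ _ (by decide : 'I' ≠ 'D')]
  have p4 : (['D','o','b'] : List Char).isPrefixOf
      ('D' :: repl ['A','p','i'] ['A','P','I']
        (repl ['U','r','l'] ['U','R','L'] (repl ['I','d'] ['I','D'] X))) = false := by
    rw [isPrefixOf_cons_cons]
    apply isPrefixOf_eq_false_of_take_ne
    rw [show (['o','b'] : List Char).length = 2 from rfl, stage3_take2 X hX]
    exact hob
  rw [repl_cons_not _ _ _ _ p4]
  rw [repl_cons_ne _ _ _ _ _ (by decide : 'I' ≠ 'S'), repl_cons_ne _ _ _ _ _ (by decide : 'D' ≠ 'S')]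

theorem R5_Url (X : List Char) :
    R5 ('U'::'r'::'l'::X) = 'U'::'R'::'L':: R5 X := by
  unfold R5
  rw [repl_cons_ne _ _ _ _ _ (by decide : 'U' ≠ 'I'), repl_cons_ne _ _ _ _ _ (by decide : 'r' ≠ 'I'),
      repl_cons_ne _ _ _ _ _ (by decide : 'l' ≠ 'I')]
  rw [repl_Url_match]
  rw [repl_cons_ne _ _ _ _ _ (by decide : 'U' ≠ 'A'), repl_cons_ne _ _ _ _ _ (by decide : 'R' ≠ 'A'),
      repl_cons_ne _ _ _ _ _ (by decide : 'L' ≠ 'A')]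
  rw [repl_cons_ne _ _ _ _ _ (by decide : 'U' ≠ 'D'), repl_cons_ne _ _ _ _ _ (by decide : 'R' ≠ 'D'),
      repl_cons_ne _ _ _ _ _ (by decide : 'L' ≠ 'D')]
  rw [repl_cons_ne _ _ _ _ _ (by decide : 'U' ≠ 'S'), repl_cons_ne _ _ _ _ _ (by decide : 'R' ≠ 'S'),
      repl_cons_ne _ _ _ _ _ (by decide : 'L' ≠ 'S')]

theorem R5_Api (X : List Char) :
    R5 ('A'::'p'::'i'::X) = 'A'::'P'::'I':: R5 X := by
  unfold R5
  rw [repl_cons_ne _ _ _ _ _ (by decide : 'A' ≠ 'I'), repl_cons_ne _ _ _ _ _ (by decide : 'p' ≠ 'I'),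
      repl_cons_ne _ _ _ _ _ (by decide : 'i' ≠ 'I')]
  rw [repl_cons_ne _ _ _ _ _ (by decide : 'A' ≠ 'U'), repl_cons_ne _ _ _ _ _ (by decide : 'p' ≠ 'U'),
      repl_cons_ne _ _ _ _ _ (by decide : 'i' ≠ 'U')]
  rw [repl_Api_match]
  rw [repl_cons_ne _ _ _ _ _ (by decide : 'A' ≠ 'D'), repl_cons_ne _ _ _ _ _ (by decide : 'P' ≠ 'D'),
      repl_cons_ne _ _ _ _ _ (by decide : 'I' ≠ 'D')]
  rw [repl_cons_ne _ _ _ _ _ (by decide : 'A' ≠ 'S'), repl_cons_ne _ _ _ _ _ (by decide : 'P' ≠ 'S'),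
      repl_cons_ne _ _ _ _ _ (by decide : 'I' ≠ 'S')]

theorem R5_Dob (X : List Char) :
    R5 ('D'::'o'::'b'::X) = dateL ++ R5 X := by
  unfold R5
  rw [repl_cons_ne _ _ _ _ _ (by decide : 'D' ≠ 'I'), repl_cons_ne _ _ _ _ _ (by decide : 'o' ≠ 'I'),
      repl_cons_ne _ _ _ _ _ (by decide : 'b' ≠ 'I')]
  rw [repl_cons_ne _ _ _ _ _ (by decide : 'D' ≠ 'U'), repl_cons_ne _ _ _ _ _ (by decide : 'o' ≠ 'U'),
      repl_cons_ne _ _ _ _ _ (by decide : 'b' ≠ 'U')]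
  rw [repl_cons_ne _ _ _ _ _ (by decide : 'D' ≠ 'A'), repl_cons_ne _ _ _ _ _ (by decide : 'o' ≠ 'A'),
      repl_cons_ne _ _ _ _ _ (by decide : 'b' ≠ 'A')]
  rw [repl_Dob_match]
  rw [show (dateL ++ repl ['D','o','b'] dateL
      (repl ['A','p','i'] ['A','P','I']
        (repl ['U','r','l'] ['U','R','L'] (repl ['I','d'] ['I','D'] X)))) =
    'D'::'a'::'t'::'e'::' '::'o'::'f'::' '::'B'::'i'::'r'::'t'::'h':: repl ['D','o','b'] dateL
      (repl ['A','p','i'] ['A','P','I']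
        (repl ['U','r','l'] ['U','R','L'] (repl ['I','d'] ['I','D'] X))) from rfl]
  rw [repl_cons_ne _ _ _ _ _ (by decide : 'D' ≠ 'S'),
      repl_cons_ne _ _ _ _ _ (by decide : 'a' ≠ 'S'),
      repl_cons_ne _ _ _ _ _ (by decide : 't' ≠ 'S'),
      repl_cons_ne _ _ _ _ _ (by decide : 'e' ≠ 'S'),
      repl_cons_ne _ _ _ _ _ (by decide : ' ' ≠ 'S'),
      repl_cons_ne _ _ _ _ _ (by decide : 'o' ≠ 'S'),
      repl_cons_ne _ _ _ _ _ (by decide : 'f' ≠ 'S'),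
      repl_cons_ne _ _ _ _ _ (by decide : ' ' ≠ 'S'),
      repl_cons_ne _ _ _ _ _ (by decide : 'B' ≠ 'S'),
      repl_cons_ne _ _ _ _ _ (by decide : 'i' ≠ 'S'),
      repl_cons_ne _ _ _ _ _ (by decide : 'r' ≠ 'S'),
      repl_cons_ne _ _ _ _ _ (by decide : 't' ≠ 'S'),
      repl_cons_ne _ _ _ _ _ (by decide : 'h' ≠ 'S')]
  rfl

theorem R5_Ssn (X : List Char) :
    R5 ('S'::'s'::'n'::X) = 'S'::'S'::'N':: R5 X := by
  unfold R5
  rw [repl_cons_ne _ _ _ _ _ (by decide : 'S' ≠ 'I'), repl_cons_ne _ _ _ _ _ (by decide : 's' ≠ 'I'),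
      repl_cons_ne _ _ _ _ _ (by decide : 'n' ≠ 'I')]
  rw [repl_cons_ne _ _ _ _ _ (by decide : 'S' ≠ 'U'), repl_cons_ne _ _ _ _ _ (by decide : 's' ≠ 'U'),
      repl_cons_ne _ _ _ _ _ (by decide : 'n' ≠ 'U')]
  rw [repl_cons_ne _ _ _ _ _ (by decide : 'S' ≠ 'A'), repl_cons_ne _ _ _ _ _ (by decide : 's' ≠ 'A'),
      repl_cons_ne _ _ _ _ _ (by decide : 'n' ≠ 'A')]
  rw [repl_cons_ne _ _ _ _ _ (by decide : 'S' ≠ 'D'), repl_cons_ne _ _ _ _ _ (by decide : 's' ≠ 'D'),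
      repl_cons_ne _ _ _ _ _ (by decide : 'n' ≠ 'D')]
  rw [repl_Ssn_match]

-- the titled string's first characters are the lowercased source characters
theorem titled_take1 (t : List Char) (x : Char) (hx : PySem.Chars.islower x = true)
    (h : (pyTitleGo true (t.map substChar)).take 1 = [x]) :
    (t.take 1).map PySem.Chars.lowerChar = [x] := by
  cases t with
  | nil => simp [pyTitleGo] at h
  | cons d1 t1 =>
    rw [List.map_cons] at h
    by_cases hd : d1 = '_'
    · subst hd
      rw [show substChar '_' = ' ' from rfl,
          titled_cons_notalpha true ' ' _ (by decide)] at h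
      have : ' ' = x := by simpa using h
      rw [← this] at hx
      exact absurd hx (by decide)
    · rw [show substChar d1 = d1 from by unfold substChar; rw [if_neg hd]] at h
      by_cases ha : PySem.Chars.isalpha d1 = true
      · rw [titled_cons_alpha_true d1 _ ha] at h
        have he : PySem.Chars.lowerChar d1 = x := by simpa using h
        simp [he]
      · rw [titled_cons_notalpha true d1 _ (bool_eq_false_of_not ha)] at h
        have : d1 = x := by simpa using h
        rw [← this] at hx
        exact absurd (isalpha_of_islower d1 hx) ha

theorem titled_take2 (t : List Char) (x y : Char) (hx : PySem.Chars.islower x = true)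
    (hy : PySem.Chars.islower y = true)
    (h : (pyTitleGo true (t.map substChar)).take 2 = [x, y]) :
    (t.take 2).map PySem.Chars.lowerChar = [x, y] := by
  cases t with
  | nil => simp [pyTitleGo] at h
  | cons d1 t1 =>
    rw [List.map_cons] at h
    by_cases hd : d1 = '_'
    · subst hd
      rw [show substChar '_' = ' ' from rfl,
          titled_cons_notalpha true ' ' _ (by decide)] at h
      obtain ⟨h1, -⟩ : (' ' = x) ∧ (pyTitleGo false (t1.map substChar)).take 1 = [y] := by
        simpa using h
      rw [← h1] at hx
      exact absurd hx (by decide)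
    · rw [show substChar d1 = d1 from by unfold substChar; rw [if_neg hd]] at h
      by_cases ha : PySem.Chars.isalpha d1 = true
      · rw [titled_cons_alpha_true d1 _ ha] at h
        obtain ⟨h1, h2⟩ : (PySem.Chars.lowerChar d1 = x)
            ∧ (pyTitleGo true (t1.map substChar)).take 1 = [y] := by simpa using h
        have h3 := titled_take1 t1 y hy h2
        simp only [List.map_take] at h3 ⊢
        simp [h1, h3]
      · rw [titled_cons_notalpha true d1 _ (bool_eq_false_of_not ha)] at h
        obtain ⟨h1, -⟩ : (d1 = x) ∧ (pyTitleGo false (t1.map substChar)).take 1 = [y] := by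
          simpa using h
        rw [← h1] at hx
        exact absurd (isalpha_of_islower d1 hx) ha

-- decomposition helpers
theorem chunk_structure (c0 : Char) (t : List Char) :
    ((c0 :: t).take 3).map PySem.Chars.lowerChar
      = PySem.Chars.lowerChar c0 :: (t.take 2).map PySem.Chars.lowerChar := by
  simp

theorem chunk4_structure (c0 : Char) (t : List Char) :
    ((c0 :: t).take 4).map PySem.Chars.lowerChar
      = PySem.Chars.lowerChar c0 :: (t.take 3).map PySem.Chars.lowerChar := by
  simp

theorem take1_map_eq (t : List Char) (x : Char)
    (h : (t.take 1).map PySem.Chars.lowerChar = [x]) :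
    ∃ a r, t = a :: r ∧ PySem.Chars.lowerChar a = x := by
  match t with
  | [] => simp at h
  | a :: r => simp at h; exact ⟨a, r, rfl, h⟩

theorem take2_map_eq (t : List Char) (x y : Char)
    (h : (t.take 2).map PySem.Chars.lowerChar = [x, y]) :
    ∃ a b r, t = a :: b :: r ∧ PySem.Chars.lowerChar a = x ∧ PySem.Chars.lowerChar b = y := by
  match t with
  | [] => simp at h
  | [a] => simp at h
  | a :: b :: r => simp at h; exact ⟨a, b, r, rfl, h.1, h.2⟩

theorem prefix2_chunk (c0 : Char) (t : List Char) (x y : Char)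
    (h : ([x, y] : List Char).isPrefixOf
        (PySem.Chars.lowerChar c0 :: (t.take 2).map PySem.Chars.lowerChar) = true) :
    PySem.Chars.lowerChar c0 = x ∧ (t.take 1).map PySem.Chars.lowerChar = [y] := by
  rw [List.isPrefixOf] at h
  obtain ⟨h1, h2⟩ := Bool.and_eq_true_iff.mp h
  refine ⟨(beq_iff_eq.mp h1).symm, ?_⟩
  have hpre := List.isPrefixOf_iff_prefix.mp h2
  have htake : ((t.take 2).map PySem.Chars.lowerChar).take 1 = [y] :=
    (List.prefix_iff_eq_take.mp hpre).symm
  rw [← List.map_take, List.take_take] at htake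
  simpa using htake

theorem prefix3_chunk (c0 : Char) (t : List Char) (x y z : Char)
    (h : ([x, y, z] : List Char).isPrefixOf
        (PySem.Chars.lowerChar c0 :: (t.take 2).map PySem.Chars.lowerChar) = true) :
    PySem.Chars.lowerChar c0 = x ∧ (t.take 2).map PySem.Chars.lowerChar = [y, z] := by
  rw [List.isPrefixOf] at h
  obtain ⟨h1, h2⟩ := Bool.and_eq_true_iff.mp h
  refine ⟨(beq_iff_eq.mp h1).symm, ?_⟩
  have hpre := List.isPrefixOf_iff_prefix.mp h2
  have htake : ((t.take 2).map PySem.Chars.lowerChar).take 2 = [y, z] :=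
    (List.prefix_iff_eq_take.mp hpre).symm
  rw [← List.map_take, List.take_take] at htake
  simpa using htake

theorem startswith_eq' (s p : List Char) : PySem.Chars.startswith s p = p.isPrefixOf s := rfl

theorem idL : "id".toList = ['i','d'] := by decide
theorem urlL : "url".toList = ['u','r','l'] := by decide
theorem apiL : "api".toList = ['a','p','i'] := by decide
theorem dobL : "dob".toList = ['d','o','b'] := by decide
theorem ssnL : "ssn".toList = ['s','s','n'] := by decide
theorem IDL : "ID".toList = ['I','D'] := by decide
theorem URLL : "URL".toList = ['U','R','L'] := by decide
theorem APIL : "API".toList = ['A','P','I'] := by decide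
theorem SSNL : "SSN".toList = ['S','S','N'] := by decide
theorem DOBL : "Date of Birth".toList = dateL := by decide

theorem scanB_cons (prev : Bool) (c0 : Char) (t : List Char) :
    scanB prev (c0 :: t) =
      (if PySem.Chars.isalpha (if c0 = '_' then ' ' else c0) = false then
        (if c0 = '_' then ' ' else c0) :: scanB false t
       else if prev then PySem.Chars.lowerChar (if c0 = '_' then ' ' else c0) :: scanB true t
       else if PySem.Chars.startswith (((c0 :: t).take 3).map PySem.Chars.lowerChar) "id".toList then
        "ID".toList ++ scanB true (t.drop 1)
       else if PySem.Chars.startswith (((c0 :: t).take 3).map PySem.Chars.lowerChar) "url".toList then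
        "URL".toList ++ scanB true (t.drop 2)
       else if PySem.Chars.startswith (((c0 :: t).take 3).map PySem.Chars.lowerChar) "api".toList then
        "API".toList ++ scanB true (t.drop 2)
       else if PySem.Chars.startswith (((c0 :: t).take 3).map PySem.Chars.lowerChar) "dob".toList then
        "Date of Birth".toList ++ scanB true (t.drop 2)
       else if PySem.Chars.startswith (((c0 :: t).take 3).map PySem.Chars.lowerChar) "ssn".toList then
        "SSN".toList ++ scanB true (t.drop 2)
       else PySem.Chars.upperChar (if c0 = '_' then ' ' else c0) :: scanB true t) := by
  rw [scanB]

-- unfolding facts for the pattern scan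
theorem aux_false_tail (prev : Bool) (c : Char) (t : List Char)
    (h : hasIdob prev (c :: t) = false) :
    hasIdob (PySem.Chars.isalpha c) t = false := by
  rw [hasIdob] at h
  exact (Bool.or_eq_false_iff.mp h).2

theorem aux_false_head (c : Char) (t : List Char)
    (h : hasIdob false (c :: t) = false) :
    ((c :: t).take 4).map PySem.Chars.lowerChar ≠ ['i','d','o','b'] := by
  rw [hasIdob] at h
  have h1 := (Bool.or_eq_false_iff.mp h).1
  simpa using h1

theorem main_lemma : ∀ n u prev, List.length u ≤ n → hasIdob prev u = false →
    R5 (pyTitleGo prev (u.map substChar)) = scanB prev u := by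
  intro n
  induction n with
  | zero =>
    intro u prev hu _
    have hnil : u = [] := List.eq_nil_of_length_eq_zero (Nat.le_zero.mp hu)
    subst hnil
    simp [R5, pyTitleGo, scanB, repl_nil]
  | succ n ih =>
    intro u prev hu haux
    cases u with
    | nil => simp [R5, pyTitleGo, scanB, repl_nil]
    | cons c0 t =>
      have hlen : t.length ≤ n := by simp at hu; omega
      have htail := aux_false_tail prev c0 t haux
      by_cases hc0 : c0 = '_'
      · subst hc0
        rw [show PySem.Chars.isalpha '_' = false from by decide] at htail
        rw [List.map_cons, show substChar '_' = ' ' from rfl,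
            titled_cons_notalpha prev ' ' _ (by decide),
            R5_cons_notUpper ' ' _ (by decide),
            ih t false hlen htail, scanB_cons]
        simp [show PySem.Chars.isalpha ' ' = false from by decide]
      · have hsub : substChar c0 = c0 := by unfold substChar; rw [if_neg hc0]
        by_cases hA : PySem.Chars.isalpha c0 = true
        · rw [hA] at htail
          cases prev with
          | true =>
            rw [List.map_cons, hsub, titled_cons_alpha_true c0 _ hA,
                R5_cons_notUpper _ _ (isupper_lowerChar c0 hA),
                ih t true hlen htail, scanB_cons]
            simp [hc0, hA]
          | false =>
            have hne := aux_false_head c0 t haux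
            rw [List.map_cons, hsub, titled_cons_alpha_false c0 _ hA]
            by_cases h2 : PySem.Chars.startswith
                (((c0 :: t).take 3).map PySem.Chars.lowerChar) "id".toList = true
            · have h2' := h2
              rw [startswith_eq', idL, chunk_structure] at h2'
              obtain ⟨e0, e1'⟩ := prefix2_chunk c0 t 'i' 'd' h2'
              obtain ⟨c2, t₂, rfl, e2⟩ := take1_map_eq t _ e1'
              have htail2 : hasIdob true t₂ = false := by
                have h'' := aux_false_tail _ c2 t₂ htail
                rwa [isalpha_of_lowerChar_eq c2 'd' (by decide) e2] at h''
              have hob : (pyTitleGo true (t₂.map substChar)).take 2 ≠ ['o','b'] := by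
                intro heq
                have hmap := titled_take2 t₂ 'o' 'b' (by decide) (by decide) heq
                apply hne
                rw [chunk4_structure, e0]
                simp only [List.take_succ_cons, List.map_cons]
                rw [e2]
                simpa using hmap
              rw [List.map_cons, substChar_of_lowerChar c2 'd' (by decide) e2,
                  titled_cons_alpha_true c2 _ (isalpha_of_lowerChar_eq c2 'd' (by decide) e2),
                  e2, upperChar_of_lowerChar c0 'i' 'I' (by decide) (by decide) (by decide) e0,
                  R5_Id _ (headNotUpper_titleGo_true _) hob,
                  ih t₂ true (by simp at hu; omega) htail2,
                  scanB_cons, if_neg hc0]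
              rw [if_neg (show ¬(PySem.Chars.isalpha c0 = false) from by simp [hA])]
              rw [if_neg (show ¬(false = true) from by decide)]
              rw [if_pos h2]
              simp [IDL]
            · by_cases h3 : PySem.Chars.startswith
                  (((c0 :: t).take 3).map PySem.Chars.lowerChar) "url".toList = true
              · have h3' := h3
                rw [startswith_eq', urlL, chunk_structure] at h3'
                obtain ⟨e0, e1'⟩ := prefix3_chunk c0 t 'u' 'r' 'l' h3'
                obtain ⟨c2, c3, t₂, rfl, e2, e3⟩ := take2_map_eq t _ _ e1'
                have htail2 : hasIdob true t₂ = false := by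
                  have h'' := aux_false_tail _ c3 t₂ (aux_false_tail _ c2 (c3 :: t₂) htail)
                  rwa [isalpha_of_lowerChar_eq c3 'l' (by decide) e3] at h''
                rw [List.map_cons, List.map_cons,
                    substChar_of_lowerChar c2 'r' (by decide) e2,
                    substChar_of_lowerChar c3 'l' (by decide) e3,
                    titled_cons_alpha_true c2 _ (isalpha_of_lowerChar_eq c2 'r' (by decide) e2),
                    titled_cons_alpha_true c3 _ (isalpha_of_lowerChar_eq c3 'l' (by decide) e3),
                    e2, e3, upperChar_of_lowerChar c0 'u' 'U' (by decide) (by decide) (by decide) e0,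
                    R5_Url, ih t₂ true (by simp at hu; omega) htail2,
                    scanB_cons, if_neg hc0]
                rw [if_neg (show ¬(PySem.Chars.isalpha c0 = false) from by simp [hA])]
                rw [if_neg (show ¬(false = true) from by decide)]
                rw [if_neg h2, if_pos h3]
                simp [URLL]
              · by_cases h4 : PySem.Chars.startswith
                    (((c0 :: t).take 3).map PySem.Chars.lowerChar) "api".toList = true
                · have h4' := h4
                  rw [startswith_eq', apiL, chunk_structure] at h4'
                  obtain ⟨e0, e1'⟩ := prefix3_chunk c0 t 'a' 'p' 'i' h4'
                  obtain ⟨c2, c3, t₂, rfl, e2, e3⟩ := take2_map_eq t _ _ e1'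
                  have htail2 : hasIdob true t₂ = false := by
                    have h'' := aux_false_tail _ c3 t₂ (aux_false_tail _ c2 (c3 :: t₂) htail)
                    rwa [isalpha_of_lowerChar_eq c3 'i' (by decide) e3] at h''
                  rw [List.map_cons, List.map_cons,
                      substChar_of_lowerChar c2 'p' (by decide) e2,
                      substChar_of_lowerChar c3 'i' (by decide) e3,
                      titled_cons_alpha_true c2 _ (isalpha_of_lowerChar_eq c2 'p' (by decide) e2),
                      titled_cons_alpha_true c3 _ (isalpha_of_lowerChar_eq c3 'i' (by decide) e3),
                      e2, e3, upperChar_of_lowerChar c0 'a' 'A' (by decide) (by decide) (by decide) e0,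
                      R5_Api, ih t₂ true (by simp at hu; omega) htail2,
                      scanB_cons, if_neg hc0]
                  rw [if_neg (show ¬(PySem.Chars.isalpha c0 = false) from by simp [hA])]
                  rw [if_neg (show ¬(false = true) from by decide)]
                  rw [if_neg h2, if_neg h3, if_pos h4]
                  simp [APIL]
                · by_cases h5 : PySem.Chars.startswith
                      (((c0 :: t).take 3).map PySem.Chars.lowerChar) "dob".toList = true
                  · have h5' := h5
                    rw [startswith_eq', dobL, chunk_structure] at h5'
                    obtain ⟨e0, e1'⟩ := prefix3_chunk c0 t 'd' 'o' 'b' h5'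
                    obtain ⟨c2, c3, t₂, rfl, e2, e3⟩ := take2_map_eq t _ _ e1'
                    have htail2 : hasIdob true t₂ = false := by
                      have h'' := aux_false_tail _ c3 t₂ (aux_false_tail _ c2 (c3 :: t₂) htail)
                      rwa [isalpha_of_lowerChar_eq c3 'b' (by decide) e3] at h''
                    rw [List.map_cons, List.map_cons,
                        substChar_of_lowerChar c2 'o' (by decide) e2,
                        substChar_of_lowerChar c3 'b' (by decide) e3,
                        titled_cons_alpha_true c2 _ (isalpha_of_lowerChar_eq c2 'o' (by decide) e2),
                        titled_cons_alpha_true c3 _ (isalpha_of_lowerChar_eq c3 'b' (by decide) e3),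
                        e2, e3, upperChar_of_lowerChar c0 'd' 'D' (by decide) (by decide) (by decide) e0,
                        R5_Dob, ih t₂ true (by simp at hu; omega) htail2,
                        scanB_cons, if_neg hc0]
                    rw [if_neg (show ¬(PySem.Chars.isalpha c0 = false) from by simp [hA])]
                    rw [if_neg (show ¬(false = true) from by decide)]
                    rw [if_neg h2, if_neg h3, if_neg h4, if_pos h5]
                    simp [DOBL]
                  · by_cases h6 : PySem.Chars.startswith
                        (((c0 :: t).take 3).map PySem.Chars.lowerChar) "ssn".toList = true
                    · have h6' := h6
                      rw [startswith_eq', ssnL, chunk_structure] at h6'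
                      obtain ⟨e0, e1'⟩ := prefix3_chunk c0 t 's' 's' 'n' h6'
                      obtain ⟨c2, c3, t₂, rfl, e2, e3⟩ := take2_map_eq t _ _ e1'
                      have htail2 : hasIdob true t₂ = false := by
                        have h'' := aux_false_tail _ c3 t₂ (aux_false_tail _ c2 (c3 :: t₂) htail)
                        rwa [isalpha_of_lowerChar_eq c3 'n' (by decide) e3] at h''
                      rw [List.map_cons, List.map_cons,
                          substChar_of_lowerChar c2 's' (by decide) e2,
                          substChar_of_lowerChar c3 'n' (by decide) e3,
                          titled_cons_alpha_true c2 _ (isalpha_of_lowerChar_eq c2 's' (by decide) e2),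
                          titled_cons_alpha_true c3 _ (isalpha_of_lowerChar_eq c3 'n' (by decide) e3),
                          e2, e3, upperChar_of_lowerChar c0 's' 'S' (by decide) (by decide) (by decide) e0,
                          R5_Ssn, ih t₂ true (by simp at hu; omega) htail2,
                          scanB_cons, if_neg hc0]
                      rw [if_neg (show ¬(PySem.Chars.isalpha c0 = false) from by simp [hA])]
                      rw [if_neg (show ¬(false = true) from by decide)]
                      rw [if_neg h2, if_neg h3, if_neg h4, if_neg h5, if_pos h6]
                      simp [SSNL]
                    · have hX := headNotUpper_titleGo_true (t.map substChar)
                      have hlow : PySem.Chars.lowerChar (PySem.Chars.upperChar c0)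
                          = PySem.Chars.lowerChar c0 := lowerChar_upperChar c0
                      have hId : PySem.Chars.upperChar c0 = 'I' →
                          (pyTitleGo true (t.map substChar)).take 1 ≠ ['d'] := by
                        intro hU heq
                        have e0 : PySem.Chars.lowerChar c0 = 'i' := by rw [← hlow, hU]; decide
                        have hd := titled_take1 t 'd' (by decide) heq
                        obtain ⟨c2, t₂, rfl, e2⟩ := take1_map_eq t _ hd
                        apply h2
                        rw [startswith_eq', idL, chunk_structure, e0]
                        simp only [List.take_succ_cons, List.map_cons]
                        rw [e2]
                        simp [List.isPrefixOf]
                      have hUrl : PySem.Chars.upperChar c0 = 'U' →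
                          (pyTitleGo true (t.map substChar)).take 2 ≠ ['r','l'] := by
                        intro hU heq
                        have e0 : PySem.Chars.lowerChar c0 = 'u' := by rw [← hlow, hU]; decide
                        have hd := titled_take2 t 'r' 'l' (by decide) (by decide) heq
                        obtain ⟨c2, c3, t₂, rfl, e2, e3⟩ := take2_map_eq t _ _ hd
                        apply h3
                        rw [startswith_eq', urlL, chunk_structure, e0]
                        simp only [List.take_succ_cons, List.map_cons]
                        rw [e2, e3]
                        simp [List.isPrefixOf]
                      have hApi : PySem.Chars.upperChar c0 = 'A' →
                          (pyTitleGo true (t.map substChar)).take 2 ≠ ['p','i'] := by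
                        intro hU heq
                        have e0 : PySem.Chars.lowerChar c0 = 'a' := by rw [← hlow, hU]; decide
                        have hd := titled_take2 t 'p' 'i' (by decide) (by decide) heq
                        obtain ⟨c2, c3, t₂, rfl, e2, e3⟩ := take2_map_eq t _ _ hd
                        apply h4
                        rw [startswith_eq', apiL, chunk_structure, e0]
                        simp only [List.take_succ_cons, List.map_cons]
                        rw [e2, e3]
                        simp [List.isPrefixOf]
                      have hDob : PySem.Chars.upperChar c0 = 'D' →
                          (pyTitleGo true (t.map substChar)).take 2 ≠ ['o','b'] := by
                        intro hU heq
                        have e0 : PySem.Chars.lowerChar c0 = 'd' := by rw [← hlow, hU]; decide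
                        have hd := titled_take2 t 'o' 'b' (by decide) (by decide) heq
                        obtain ⟨c2, c3, t₂, rfl, e2, e3⟩ := take2_map_eq t _ _ hd
                        apply h5
                        rw [startswith_eq', dobL, chunk_structure, e0]
                        simp only [List.take_succ_cons, List.map_cons]
                        rw [e2, e3]
                        simp [List.isPrefixOf]
                      have hSsn : PySem.Chars.upperChar c0 = 'S' →
                          (pyTitleGo true (t.map substChar)).take 2 ≠ ['s','n'] := by
                        intro hU heq
                        have e0 : PySem.Chars.lowerChar c0 = 's' := by rw [← hlow, hU]; decide
                        have hd := titled_take2 t 's' 'n' (by decide) (by decide) heq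
                        obtain ⟨c2, c3, t₂, rfl, e2, e3⟩ := take2_map_eq t _ _ hd
                        apply h6
                        rw [startswith_eq', ssnL, chunk_structure, e0]
                        simp only [List.take_succ_cons, List.map_cons]
                        rw [e2, e3]
                        simp [List.isPrefixOf]
                      rw [R5_runstart _ _ hX hId hUrl hApi hDob hSsn,
                          ih t true hlen htail, scanB_cons, if_neg hc0]
                      rw [if_neg (show ¬(PySem.Chars.isalpha c0 = false) from by simp [hA])]
                      rw [if_neg (show ¬(false = true) from by decide)]
                      rw [if_neg h2, if_neg h3, if_neg h4, if_neg h5, if_neg h6]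
        · have hA' : PySem.Chars.isalpha c0 = false := bool_eq_false_of_not hA
          rw [hA'] at htail
          rw [List.map_cons, hsub, titled_cons_notalpha prev c0 _ hA',
              R5_cons_notUpper c0 _ (isupper_false_of_not_alpha c0 hA'),
              ih t false hlen htail, scanB_cons]
          simp [hc0, hA']

theorem keyIdL : "Id".toList = ['I','d'] := by decide
theorem keyUrlL : "Url".toList = ['U','r','l'] := by decide
theorem keyApiL : "Api".toList = ['A','p','i'] := by decide
theorem keyDobL : "Dob".toList = ['D','o','b'] := by decide
theorem keySsnL : "Ssn".toList = ['S','s','n'] := by decide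
theorem underL : "_".toList = ['_'] := by decide
theorem spaceL : " ".toList = [' '] := by decide

theorem replace_go_eq (old new : List Char) (h : old ≠ []) :
    ∀ fuel l acc, l.length ≤ fuel →
      PySem.Chars.replace.go old new fuel l acc = acc.reverse ++ repl old new l := by
  intro fuel
  induction fuel with
  | zero =>
    intro l acc hl
    have hnil : l = [] := List.eq_nil_of_length_eq_zero (Nat.le_zero.mp hl)
    subst hnil
    simp [PySem.Chars.replace.go, repl_nil]
  | succ n ihf =>
    intro l acc hl
    cases l with
    | nil => simp [PySem.Chars.replace.go, repl_nil]
    | cons c t =>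
      rw [PySem.Chars.replace.go]
      split
      · next hpre =>
        obtain ⟨a, old', rfl⟩ : ∃ a o, old = a :: o := by
          cases old with
          | nil => exact absurd rfl h
          | cons a o => exact ⟨a, o, rfl⟩
        have hdrop : List.drop (a :: old').length (c :: t) = t.drop ((a :: old').length - 1) := by
          simp
        rw [hdrop, ihf _ _ (by simp at hl ⊢; omega)]
        conv_rhs => rw [repl, if_pos hpre]
        simp
      · next hpre =>
        have hfalse : old.isPrefixOf (c :: t) = false := bool_eq_false_of_not hpre
        rw [ihf t (c :: acc) (by simp at hl; omega), repl_cons_not _ _ _ _ hfalse]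
        simp

theorem replace_eq_repl (s old new : List Char) (h : old ≠ []) :
    PySem.Chars.replace s old new = repl old new s := by
  unfold PySem.Chars.replace
  have he : old.isEmpty = false := by
    cases old with
    | nil => exact absurd rfl h
    | cons a o => rfl
  rw [he]
  simpa using replace_go_eq old new h s.length s [] le_rfl

theorem str_eq_of_toList (s t : String) (h : s.toList = t.toList) : s = t :=
  String.toList_inj.mp h


theorem take3_map_eq (t : List Char) (x y z : Char)
    (h : (t.take 3).map PySem.Chars.lowerChar = [x, y, z]) :
    ∃ a b c r, t = a :: b :: c :: r ∧ PySem.Chars.lowerChar a = x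
      ∧ PySem.Chars.lowerChar b = y ∧ PySem.Chars.lowerChar c = z := by
  match t with
  | [] => simp at h
  | [a] => simp at h
  | [a, b] => simp at h
  | a :: b :: c :: r => simp at h; exact ⟨a, b, c, r, rfl, h.1, h.2.1, h.2.2⟩

theorem R5_Idob (X : List Char) :
    R5 ('I'::'d'::'o'::'b'::X) = 'I' :: (dateL ++ R5 X) := by
  unfold R5
  rw [repl_Id_match]
  rw [repl_cons_ne _ _ _ _ _ (by decide : 'o' ≠ 'I'), repl_cons_ne _ _ _ _ _ (by decide : 'b' ≠ 'I')]
  rw [repl_cons_ne _ _ _ _ _ (by decide : 'I' ≠ 'U'), repl_cons_ne _ _ _ _ _ (by decide : 'D' ≠ 'U'),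
      repl_cons_ne _ _ _ _ _ (by decide : 'o' ≠ 'U'), repl_cons_ne _ _ _ _ _ (by decide : 'b' ≠ 'U')]
  rw [repl_cons_ne _ _ _ _ _ (by decide : 'I' ≠ 'A'), repl_cons_ne _ _ _ _ _ (by decide : 'D' ≠ 'A'),
      repl_cons_ne _ _ _ _ _ (by decide : 'o' ≠ 'A'), repl_cons_ne _ _ _ _ _ (by decide : 'b' ≠ 'A')]
  rw [repl_cons_ne _ _ _ _ _ (by decide : 'I' ≠ 'D'), repl_Dob_match]
  rw [repl_cons_ne _ _ _ _ _ (by decide : 'I' ≠ 'S')]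
  rw [show (dateL ++ repl ['D','o','b'] dateL
      (repl ['A','p','i'] ['A','P','I']
        (repl ['U','r','l'] ['U','R','L'] (repl ['I','d'] ['I','D'] X)))) =
    'D'::'a'::'t'::'e'::' '::'o'::'f'::' '::'B'::'i'::'r'::'t'::'h':: repl ['D','o','b'] dateL
      (repl ['A','p','i'] ['A','P','I']
        (repl ['U','r','l'] ['U','R','L'] (repl ['I','d'] ['I','D'] X))) from rfl]
  rw [repl_cons_ne _ _ _ _ _ (by decide : 'D' ≠ 'S'),
      repl_cons_ne _ _ _ _ _ (by decide : 'a' ≠ 'S'),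
      repl_cons_ne _ _ _ _ _ (by decide : 't' ≠ 'S'),
      repl_cons_ne _ _ _ _ _ (by decide : 'e' ≠ 'S'),
      repl_cons_ne _ _ _ _ _ (by decide : ' ' ≠ 'S'),
      repl_cons_ne _ _ _ _ _ (by decide : 'o' ≠ 'S'),
      repl_cons_ne _ _ _ _ _ (by decide : 'f' ≠ 'S'),
      repl_cons_ne _ _ _ _ _ (by decide : ' ' ≠ 'S'),
      repl_cons_ne _ _ _ _ _ (by decide : 'B' ≠ 'S'),
      repl_cons_ne _ _ _ _ _ (by decide : 'i' ≠ 'S'),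
      repl_cons_ne _ _ _ _ _ (by decide : 'r' ≠ 'S'),
      repl_cons_ne _ _ _ _ _ (by decide : 't' ≠ 'S'),
      repl_cons_ne _ _ _ _ _ (by decide : 'h' ≠ 'S')]
  rfl

-- proof-side counter of A's Id->ID->Dob cascades along B's traversal
def countB : Bool → List Char → Nat
  | _, [] => 0
  | prev, c0 :: t =>
    let c := if c0 = '_' then ' ' else c0
    if PySem.Chars.isalpha c = false then countB false t
    else if prev then countB true t
    else if ((c0 :: t).take 4).map PySem.Chars.lowerChar = ['i','d','o','b'] then
      1 + countB true (t.drop 3)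
    else
      let chunk := ((c0 :: t).take 3).map PySem.Chars.lowerChar
      if PySem.Chars.startswith chunk "id".toList then countB true (t.drop 1)
      else if PySem.Chars.startswith chunk "url".toList then countB true (t.drop 2)
      else if PySem.Chars.startswith chunk "api".toList then countB true (t.drop 2)
      else if PySem.Chars.startswith chunk "dob".toList then countB true (t.drop 2)
      else if PySem.Chars.startswith chunk "ssn".toList then countB true (t.drop 2)
      else countB true t
termination_by _ l => l.length
decreasing_by all_goals (simp; try omega)

theorem countB_cons (prev : Bool) (c0 : Char) (t : List Char) :
    countB prev (c0 :: t) =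
      (if PySem.Chars.isalpha (if c0 = '_' then ' ' else c0) = false then countB false t
       else if prev then countB true t
       else if ((c0 :: t).take 4).map PySem.Chars.lowerChar = ['i','d','o','b'] then
        1 + countB true (t.drop 3)
       else if PySem.Chars.startswith (((c0 :: t).take 3).map PySem.Chars.lowerChar) "id".toList then
        countB true (t.drop 1)
       else if PySem.Chars.startswith (((c0 :: t).take 3).map PySem.Chars.lowerChar) "url".toList then
        countB true (t.drop 2)
       else if PySem.Chars.startswith (((c0 :: t).take 3).map PySem.Chars.lowerChar) "api".toList then
        countB true (t.drop 2)
       else if PySem.Chars.startswith (((c0 :: t).take 3).map PySem.Chars.lowerChar) "dob".toList then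
        countB true (t.drop 2)
       else if PySem.Chars.startswith (((c0 :: t).take 3).map PySem.Chars.lowerChar) "ssn".toList then
        countB true (t.drop 2)
       else countB true t) := by
  rw [countB]

theorem scanB_true_alpha (c : Char) (t : List Char) (hA : PySem.Chars.isalpha c = true)
    (hne : c ≠ '_') : scanB true (c :: t) = PySem.Chars.lowerChar c :: scanB true t := by
  rw [scanB_cons]
  simp [hne, hA]

theorem ne_underscore_of_lowerChar (c ℓ : Char) (hℓ : PySem.Chars.islower ℓ = true)
    (h : PySem.Chars.lowerChar c = ℓ) : c ≠ '_' := by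
  intro e
  subst e
  rw [show PySem.Chars.lowerChar '_' = '_' from by decide] at h
  subst h
  exact absurd hℓ (by decide)

theorem len_lemma : ∀ n u prev, List.length u ≤ n →
    (R5 (pyTitleGo prev (u.map substChar))).length
      = (scanB prev u).length + 10 * countB prev u := by
  intro n
  induction n with
  | zero =>
    intro u prev hu
    have hnil : u = [] := List.eq_nil_of_length_eq_zero (Nat.le_zero.mp hu)
    subst hnil
    simp [R5, pyTitleGo, scanB, countB, repl_nil]
  | succ n ih =>
    intro u prev hu
    cases u with
    | nil => simp [R5, pyTitleGo, scanB, countB, repl_nil]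
    | cons c0 t =>
      have hlen : t.length ≤ n := by simp at hu; omega
      by_cases hc0 : c0 = '_'
      · subst hc0
        have ihx := ih t false hlen
        rw [List.map_cons, show substChar '_' = ' ' from rfl,
            titled_cons_notalpha prev ' ' _ (by decide),
            R5_cons_notUpper ' ' _ (by decide), scanB_cons, countB_cons]
        simp [show PySem.Chars.isalpha ' ' = false from by decide]
        omega
      · have hsub : substChar c0 = c0 := by unfold substChar; rw [if_neg hc0]
        by_cases hA : PySem.Chars.isalpha c0 = true
        · cases prev with
          | true =>
            have ihx := ih t true hlen
            rw [List.map_cons, hsub, titled_cons_alpha_true c0 _ hA,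
                R5_cons_notUpper _ _ (isupper_lowerChar c0 hA), scanB_cons, countB_cons]
            simp [hc0, hA]
            omega
          | false =>
            rw [List.map_cons, hsub, titled_cons_alpha_false c0 _ hA]
            by_cases h1 : ((c0 :: t).take 4).map PySem.Chars.lowerChar = ['i','d','o','b']
            · have h1' := h1
              rw [chunk4_structure] at h1'
              have e0 : PySem.Chars.lowerChar c0 = 'i' := (List.cons.injEq _ _ _ _ ▸ h1').1
              have erest : (t.take 3).map PySem.Chars.lowerChar = ['d','o','b'] :=
                (List.cons.injEq _ _ _ _ ▸ h1').2
              obtain ⟨c2, c3, c4, t₂, rfl, e2, e3, e4⟩ := take3_map_eq t _ _ _ erest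
              have hpos : PySem.Chars.startswith
                  (((c0 :: c2 :: c3 :: c4 :: t₂).take 3).map PySem.Chars.lowerChar)
                  "id".toList = true := by
                rw [startswith_eq', idL, chunk_structure, e0]
                simp only [List.take_succ_cons, List.map_cons]
                rw [e2]
                simp [List.isPrefixOf]
              have ihx := ih t₂ true (by simp at hu; omega)
              have hcount : countB false (c0 :: c2 :: c3 :: c4 :: t₂) = 1 + countB true t₂ := by
                rw [countB_cons, if_neg (show ¬(PySem.Chars.isalpha (if c0 = '_' then ' ' else c0) = false) from by simp [hc0, hA]),
                    if_neg (show ¬(false = true) from by decide), if_pos h1]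
                rfl
              rw [List.map_cons, List.map_cons, List.map_cons,
                  substChar_of_lowerChar c2 'd' (by decide) e2,
                  substChar_of_lowerChar c3 'o' (by decide) e3,
                  substChar_of_lowerChar c4 'b' (by decide) e4,
                  titled_cons_alpha_true c2 _ (isalpha_of_lowerChar_eq c2 'd' (by decide) e2),
                  titled_cons_alpha_true c3 _ (isalpha_of_lowerChar_eq c3 'o' (by decide) e3),
                  titled_cons_alpha_true c4 _ (isalpha_of_lowerChar_eq c4 'b' (by decide) e4),
                  e2, e3, e4,
                  upperChar_of_lowerChar c0 'i' 'I' (by decide) (by decide) (by decide) e0,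
                  R5_Idob, scanB_cons, if_neg hc0]
              rw [if_neg (show ¬(PySem.Chars.isalpha c0 = false) from by simp [hA])]
              rw [if_neg (show ¬(false = true) from by decide)]
              rw [if_pos hpos, hcount,
                  show ((c2 :: c3 :: c4 :: t₂).drop 1) = c3 :: c4 :: t₂ from rfl,
                  scanB_true_alpha c3 _ (isalpha_of_lowerChar_eq c3 'o' (by decide) e3)
                    (ne_underscore_of_lowerChar c3 'o' (by decide) e3),
                  scanB_true_alpha c4 _ (isalpha_of_lowerChar_eq c4 'b' (by decide) e4)
                    (ne_underscore_of_lowerChar c4 'b' (by decide) e4)]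
              simp [dateL, IDL]
              omega
            · by_cases h2 : PySem.Chars.startswith
                  (((c0 :: t).take 3).map PySem.Chars.lowerChar) "id".toList = true
              · have h2' := h2
                rw [startswith_eq', idL, chunk_structure] at h2'
                obtain ⟨e0, e1'⟩ := prefix2_chunk c0 t 'i' 'd' h2'
                obtain ⟨c2, t₂, rfl, e2⟩ := take1_map_eq t _ e1'
                have hob : (pyTitleGo true (t₂.map substChar)).take 2 ≠ ['o','b'] := by
                  intro heq
                  have hmap := titled_take2 t₂ 'o' 'b' (by decide) (by decide) heq
                  apply h1
                  rw [chunk4_structure, e0]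
                  simp only [List.take_succ_cons, List.map_cons]
                  rw [e2]
                  simpa using hmap
                have ihx := ih t₂ true (by simp at hu; omega)
                have hcount : countB false (c0 :: c2 :: t₂) = countB true t₂ := by
                  rw [countB_cons, if_neg (show ¬(PySem.Chars.isalpha (if c0 = '_' then ' ' else c0) = false) from by simp [hc0, hA]),
                      if_neg (show ¬(false = true) from by decide), if_neg h1, if_pos h2]
                  rfl
                rw [List.map_cons, substChar_of_lowerChar c2 'd' (by decide) e2,
                    titled_cons_alpha_true c2 _ (isalpha_of_lowerChar_eq c2 'd' (by decide) e2),
                    e2, upperChar_of_lowerChar c0 'i' 'I' (by decide) (by decide) (by decide) e0,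
                    R5_Id _ (headNotUpper_titleGo_true _) hob,
                    scanB_cons, if_neg hc0]
                rw [if_neg (show ¬(PySem.Chars.isalpha c0 = false) from by simp [hA])]
                rw [if_neg (show ¬(false = true) from by decide)]
                rw [if_pos h2, hcount]
                simp [IDL]
                omega
              · by_cases h3 : PySem.Chars.startswith
                    (((c0 :: t).take 3).map PySem.Chars.lowerChar) "url".toList = true
                · have h3' := h3
                  rw [startswith_eq', urlL, chunk_structure] at h3'
                  obtain ⟨e0, e1'⟩ := prefix3_chunk c0 t 'u' 'r' 'l' h3'
                  obtain ⟨c2, c3, t₂, rfl, e2, e3⟩ := take2_map_eq t _ _ e1'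
                  have ihx := ih t₂ true (by simp at hu; omega)
                  have hcount : countB false (c0 :: c2 :: c3 :: t₂) = countB true t₂ := by
                    rw [countB_cons, if_neg (show ¬(PySem.Chars.isalpha (if c0 = '_' then ' ' else c0) = false) from by simp [hc0, hA]),
                      if_neg (show ¬(false = true) from by decide), if_neg h1, if_neg h2, if_pos h3]
                    rfl
                  rw [List.map_cons, List.map_cons,
                      substChar_of_lowerChar c2 'r' (by decide) e2,
                      substChar_of_lowerChar c3 'l' (by decide) e3,
                      titled_cons_alpha_true c2 _ (isalpha_of_lowerChar_eq c2 'r' (by decide) e2),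
                      titled_cons_alpha_true c3 _ (isalpha_of_lowerChar_eq c3 'l' (by decide) e3),
                      e2, e3, upperChar_of_lowerChar c0 'u' 'U' (by decide) (by decide) (by decide) e0,
                      R5_Url, scanB_cons, if_neg hc0]
                  rw [if_neg (show ¬(PySem.Chars.isalpha c0 = false) from by simp [hA])]
                  rw [if_neg (show ¬(false = true) from by decide)]
                  rw [if_neg h2, if_pos h3, hcount]
                  simp [URLL]
                  omega
                · by_cases h4 : PySem.Chars.startswith
                      (((c0 :: t).take 3).map PySem.Chars.lowerChar) "api".toList = true
                  · have h4' := h4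
                    rw [startswith_eq', apiL, chunk_structure] at h4'
                    obtain ⟨e0, e1'⟩ := prefix3_chunk c0 t 'a' 'p' 'i' h4'
                    obtain ⟨c2, c3, t₂, rfl, e2, e3⟩ := take2_map_eq t _ _ e1'
                    have ihx := ih t₂ true (by simp at hu; omega)
                    have hcount : countB false (c0 :: c2 :: c3 :: t₂) = countB true t₂ := by
                      rw [countB_cons, if_neg (show ¬(PySem.Chars.isalpha (if c0 = '_' then ' ' else c0) = false) from by simp [hc0, hA]),
                        if_neg (show ¬(false = true) from by decide), if_neg h1, if_neg h2, if_neg h3, if_pos h4]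
                      rfl
                    rw [List.map_cons, List.map_cons,
                        substChar_of_lowerChar c2 'p' (by decide) e2,
                        substChar_of_lowerChar c3 'i' (by decide) e3,
                        titled_cons_alpha_true c2 _ (isalpha_of_lowerChar_eq c2 'p' (by decide) e2),
                        titled_cons_alpha_true c3 _ (isalpha_of_lowerChar_eq c3 'i' (by decide) e3),
                        e2, e3, upperChar_of_lowerChar c0 'a' 'A' (by decide) (by decide) (by decide) e0,
                        R5_Api, scanB_cons, if_neg hc0]
                    rw [if_neg (show ¬(PySem.Chars.isalpha c0 = false) from by simp [hA])]
                    rw [if_neg (show ¬(false = true) from by decide)]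
                    rw [if_neg h2, if_neg h3, if_pos h4, hcount]
                    simp [APIL]
                    omega
                  · by_cases h5 : PySem.Chars.startswith
                        (((c0 :: t).take 3).map PySem.Chars.lowerChar) "dob".toList = true
                    · have h5' := h5
                      rw [startswith_eq', dobL, chunk_structure] at h5'
                      obtain ⟨e0, e1'⟩ := prefix3_chunk c0 t 'd' 'o' 'b' h5'
                      obtain ⟨c2, c3, t₂, rfl, e2, e3⟩ := take2_map_eq t _ _ e1'
                      have ihx := ih t₂ true (by simp at hu; omega)
                      have hcount : countB false (c0 :: c2 :: c3 :: t₂) = countB true t₂ := by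
                        rw [countB_cons, if_neg (show ¬(PySem.Chars.isalpha (if c0 = '_' then ' ' else c0) = false) from by simp [hc0, hA]),
                          if_neg (show ¬(false = true) from by decide), if_neg h1, if_neg h2, if_neg h3, if_neg h4, if_pos h5]
                        rfl
                      rw [List.map_cons, List.map_cons,
                          substChar_of_lowerChar c2 'o' (by decide) e2,
                          substChar_of_lowerChar c3 'b' (by decide) e3,
                          titled_cons_alpha_true c2 _ (isalpha_of_lowerChar_eq c2 'o' (by decide) e2),
                          titled_cons_alpha_true c3 _ (isalpha_of_lowerChar_eq c3 'b' (by decide) e3),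
                          e2, e3, upperChar_of_lowerChar c0 'd' 'D' (by decide) (by decide) (by decide) e0,
                          R5_Dob, scanB_cons, if_neg hc0]
                      rw [if_neg (show ¬(PySem.Chars.isalpha c0 = false) from by simp [hA])]
                      rw [if_neg (show ¬(false = true) from by decide)]
                      rw [if_neg h2, if_neg h3, if_neg h4, if_pos h5, hcount]
                      simp [DOBL, dateL]
                      omega
                    · by_cases h6 : PySem.Chars.startswith
                          (((c0 :: t).take 3).map PySem.Chars.lowerChar) "ssn".toList = true
                      · have h6' := h6
                        rw [startswith_eq', ssnL, chunk_structure] at h6'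
                        obtain ⟨e0, e1'⟩ := prefix3_chunk c0 t 's' 's' 'n' h6'
                        obtain ⟨c2, c3, t₂, rfl, e2, e3⟩ := take2_map_eq t _ _ e1'
                        have ihx := ih t₂ true (by simp at hu; omega)
                        have hcount : countB false (c0 :: c2 :: c3 :: t₂) = countB true t₂ := by
                          rw [countB_cons, if_neg (show ¬(PySem.Chars.isalpha (if c0 = '_' then ' ' else c0) = false) from by simp [hc0, hA]),
                            if_neg (show ¬(false = true) from by decide), if_neg h1, if_neg h2, if_neg h3, if_neg h4, if_neg h5, if_pos h6]
                          rfl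
                        rw [List.map_cons, List.map_cons,
                            substChar_of_lowerChar c2 's' (by decide) e2,
                            substChar_of_lowerChar c3 'n' (by decide) e3,
                            titled_cons_alpha_true c2 _ (isalpha_of_lowerChar_eq c2 's' (by decide) e2),
                            titled_cons_alpha_true c3 _ (isalpha_of_lowerChar_eq c3 'n' (by decide) e3),
                            e2, e3, upperChar_of_lowerChar c0 's' 'S' (by decide) (by decide) (by decide) e0,
                            R5_Ssn, scanB_cons, if_neg hc0]
                        rw [if_neg (show ¬(PySem.Chars.isalpha c0 = false) from by simp [hA])]
                        rw [if_neg (show ¬(false = true) from by decide)]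
                        rw [if_neg h2, if_neg h3, if_neg h4, if_neg h5, if_pos h6, hcount]
                        simp [SSNL]
                        omega
                      · have hX := headNotUpper_titleGo_true (t.map substChar)
                        have hlow : PySem.Chars.lowerChar (PySem.Chars.upperChar c0)
                            = PySem.Chars.lowerChar c0 := lowerChar_upperChar c0
                        have hId : PySem.Chars.upperChar c0 = 'I' →
                            (pyTitleGo true (t.map substChar)).take 1 ≠ ['d'] := by
                          intro hU heq
                          have e0 : PySem.Chars.lowerChar c0 = 'i' := by rw [← hlow, hU]; decide
                          have hd := titled_take1 t 'd' (by decide) heq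
                          obtain ⟨c2, t₂, rfl, e2⟩ := take1_map_eq t _ hd
                          apply h2
                          rw [startswith_eq', idL, chunk_structure, e0]
                          simp only [List.take_succ_cons, List.map_cons]
                          rw [e2]
                          simp [List.isPrefixOf]
                        have hUrl : PySem.Chars.upperChar c0 = 'U' →
                            (pyTitleGo true (t.map substChar)).take 2 ≠ ['r','l'] := by
                          intro hU heq
                          have e0 : PySem.Chars.lowerChar c0 = 'u' := by rw [← hlow, hU]; decide
                          have hd := titled_take2 t 'r' 'l' (by decide) (by decide) heq
                          obtain ⟨c2, c3, t₂, rfl, e2, e3⟩ := take2_map_eq t _ _ hd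
                          apply h3
                          rw [startswith_eq', urlL, chunk_structure, e0]
                          simp only [List.take_succ_cons, List.map_cons]
                          rw [e2, e3]
                          simp [List.isPrefixOf]
                        have hApi : PySem.Chars.upperChar c0 = 'A' →
                            (pyTitleGo true (t.map substChar)).take 2 ≠ ['p','i'] := by
                          intro hU heq
                          have e0 : PySem.Chars.lowerChar c0 = 'a' := by rw [← hlow, hU]; decide
                          have hd := titled_take2 t 'p' 'i' (by decide) (by decide) heq
                          obtain ⟨c2, c3, t₂, rfl, e2, e3⟩ := take2_map_eq t _ _ hd
                          apply h4
                          rw [startswith_eq', apiL, chunk_structure, e0]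
                          simp only [List.take_succ_cons, List.map_cons]
                          rw [e2, e3]
                          simp [List.isPrefixOf]
                        have hDob : PySem.Chars.upperChar c0 = 'D' →
                            (pyTitleGo true (t.map substChar)).take 2 ≠ ['o','b'] := by
                          intro hU heq
                          have e0 : PySem.Chars.lowerChar c0 = 'd' := by rw [← hlow, hU]; decide
                          have hd := titled_take2 t 'o' 'b' (by decide) (by decide) heq
                          obtain ⟨c2, c3, t₂, rfl, e2, e3⟩ := take2_map_eq t _ _ hd
                          apply h5
                          rw [startswith_eq', dobL, chunk_structure, e0]
                          simp only [List.take_succ_cons, List.map_cons]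
                          rw [e2, e3]
                          simp [List.isPrefixOf]
                        have hSsn : PySem.Chars.upperChar c0 = 'S' →
                            (pyTitleGo true (t.map substChar)).take 2 ≠ ['s','n'] := by
                          intro hU heq
                          have e0 : PySem.Chars.lowerChar c0 = 's' := by rw [← hlow, hU]; decide
                          have hd := titled_take2 t 's' 'n' (by decide) (by decide) heq
                          obtain ⟨c2, c3, t₂, rfl, e2, e3⟩ := take2_map_eq t _ _ hd
                          apply h6
                          rw [startswith_eq', ssnL, chunk_structure, e0]
                          simp only [List.take_succ_cons, List.map_cons]
                          rw [e2, e3]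
                          simp [List.isPrefixOf]
                        have ihx := ih t true hlen
                        have hcount : countB false (c0 :: t) = countB true t := by
                          rw [countB_cons, if_neg (show ¬(PySem.Chars.isalpha (if c0 = '_' then ' ' else c0) = false) from by simp [hc0, hA]),
                          if_neg (show ¬(false = true) from by decide), if_neg h1, if_neg h2, if_neg h3, if_neg h4, if_neg h5, if_neg h6]
                        rw [R5_runstart _ _ hX hId hUrl hApi hDob hSsn,
                            scanB_cons, if_neg hc0]
                        rw [if_neg (show ¬(PySem.Chars.isalpha c0 = false) from by simp [hA])]
                        rw [if_neg (show ¬(false = true) from by decide)]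
                        rw [if_neg h2, if_neg h3, if_neg h4, if_neg h5, if_neg h6, hcount]
                        simp only [List.length_cons]
                        omega
        · have hA' : PySem.Chars.isalpha c0 = false := bool_eq_false_of_not hA
          have ihx := ih t false hlen
          rw [List.map_cons, hsub, titled_cons_notalpha prev c0 _ hA',
              R5_cons_notUpper c0 _ (isupper_false_of_not_alpha c0 hA'),
              scanB_cons, countB_cons]
          simp [hc0, hA']
          omega

theorem chunk4_beq_false_of_not_alpha (c0 : Char) (t : List Char)
    (h : PySem.Chars.isalpha c0 = false) :
    ((((c0 :: t).take 4).map PySem.Chars.lowerChar) == ['i','d','o','b']) = false := by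
  apply beq_eq_false_iff_ne.mpr
  intro he
  rw [chunk4_structure] at he
  have e0 : PySem.Chars.lowerChar c0 = 'i' := (List.cons.injEq _ _ _ _ ▸ he).1
  exact absurd (isalpha_of_lowerChar_eq c0 'i' (by decide) e0) (by simp [h])

theorem count_pos : ∀ n u prev, List.length u ≤ n → hasIdob prev u = true →
    1 ≤ countB prev u := by
  intro n
  induction n with
  | zero =>
    intro u prev hu hh
    have hnil : u = [] := List.eq_nil_of_length_eq_zero (Nat.le_zero.mp hu)
    subst hnil
    simp [hasIdob] at hh
  | succ n ih =>
    intro u prev hu hh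
    cases u with
    | nil => simp [hasIdob] at hh
    | cons c0 t =>
      have hlen : t.length ≤ n := by simp at hu; omega
      rw [hasIdob] at hh
      rw [countB_cons]
      by_cases hc0 : c0 = '_'
      · subst hc0
        have hhead : ((((('_') :: t).take 4).map PySem.Chars.lowerChar) == ['i','d','o','b']) = false :=
          chunk4_beq_false_of_not_alpha '_' t (by decide)
        rw [hhead] at hh
        simp at hh
        rw [show PySem.Chars.isalpha '_' = false from by decide] at hh
        simp [show PySem.Chars.isalpha ' ' = false from by decide]
        exact ih t false hlen hh
      · by_cases hA : PySem.Chars.isalpha c0 = true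
        · cases prev with
          | true =>
            simp at hh
            rw [hA] at hh
            simp [hc0, hA]
            exact ih t true hlen hh
          | false =>
            by_cases h1 : ((c0 :: t).take 4).map PySem.Chars.lowerChar = ['i','d','o','b']
            · rw [if_neg (show ¬(PySem.Chars.isalpha (if c0 = '_' then ' ' else c0) = false)
                from by simp [hc0, hA]), if_neg (show ¬(false = true) from by decide), if_pos h1]
              omega
            · rw [beq_eq_false_iff_ne.mpr h1] at hh
              simp at hh
              rw [hA] at hh
              rw [if_neg (show ¬(PySem.Chars.isalpha (if c0 = '_' then ' ' else c0) = false)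
                from by simp [hc0, hA]), if_neg (show ¬(false = true) from by decide), if_neg h1]
              by_cases h2 : PySem.Chars.startswith
                  (((c0 :: t).take 3).map PySem.Chars.lowerChar) "id".toList = true
              · have h2' := h2
                rw [startswith_eq', idL, chunk_structure] at h2'
                obtain ⟨e0, e1'⟩ := prefix2_chunk c0 t 'i' 'd' h2'
                obtain ⟨c2, t₂, rfl, e2⟩ := take1_map_eq t _ e1'
                rw [if_pos h2, show ((c2 :: t₂).drop 1) = t₂ from rfl]
                rw [hasIdob] at hh
                simp at hh
                rw [isalpha_of_lowerChar_eq c2 'd' (by decide) e2] at hh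
                exact ih t₂ true (by simp at hu; omega) hh
              · rw [if_neg h2]
                by_cases h3 : PySem.Chars.startswith
                    (((c0 :: t).take 3).map PySem.Chars.lowerChar) "url".toList = true
                · have h3' := h3
                  rw [startswith_eq', urlL, chunk_structure] at h3'
                  obtain ⟨e0, e1'⟩ := prefix3_chunk c0 t 'u' 'r' 'l' h3'
                  obtain ⟨c2, c3, t₂, rfl, e2, e3⟩ := take2_map_eq t _ _ e1'
                  rw [if_pos h3, show ((c2 :: c3 :: t₂).drop 2) = t₂ from rfl]
                  rw [hasIdob] at hh
                  simp at hh
                  rw [isalpha_of_lowerChar_eq c2 'r' (by decide) e2] at hh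
                  rw [hasIdob] at hh
                  simp at hh
                  rw [isalpha_of_lowerChar_eq c3 'l' (by decide) e3] at hh
                  exact ih t₂ true (by simp at hu; omega) hh
                · rw [if_neg h3]
                  by_cases h4 : PySem.Chars.startswith
                      (((c0 :: t).take 3).map PySem.Chars.lowerChar) "api".toList = true
                  · have h4' := h4
                    rw [startswith_eq', apiL, chunk_structure] at h4'
                    obtain ⟨e0, e1'⟩ := prefix3_chunk c0 t 'a' 'p' 'i' h4'
                    obtain ⟨c2, c3, t₂, rfl, e2, e3⟩ := take2_map_eq t _ _ e1'
                    rw [if_pos h4, show ((c2 :: c3 :: t₂).drop 2) = t₂ from rfl]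
                    rw [hasIdob] at hh
                    simp at hh
                    rw [isalpha_of_lowerChar_eq c2 'p' (by decide) e2] at hh
                    rw [hasIdob] at hh
                    simp at hh
                    rw [isalpha_of_lowerChar_eq c3 'i' (by decide) e3] at hh
                    exact ih t₂ true (by simp at hu; omega) hh
                  · rw [if_neg h4]
                    by_cases h5 : PySem.Chars.startswith
                        (((c0 :: t).take 3).map PySem.Chars.lowerChar) "dob".toList = true
                    · have h5' := h5
                      rw [startswith_eq', dobL, chunk_structure] at h5'
                      obtain ⟨e0, e1'⟩ := prefix3_chunk c0 t 'd' 'o' 'b' h5'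
                      obtain ⟨c2, c3, t₂, rfl, e2, e3⟩ := take2_map_eq t _ _ e1'
                      rw [if_pos h5, show ((c2 :: c3 :: t₂).drop 2) = t₂ from rfl]
                      rw [hasIdob] at hh
                      simp at hh
                      rw [isalpha_of_lowerChar_eq c2 'o' (by decide) e2] at hh
                      rw [hasIdob] at hh
                      simp at hh
                      rw [isalpha_of_lowerChar_eq c3 'b' (by decide) e3] at hh
                      exact ih t₂ true (by simp at hu; omega) hh
                    · rw [if_neg h5]
                      by_cases h6 : PySem.Chars.startswith
                          (((c0 :: t).take 3).map PySem.Chars.lowerChar) "ssn".toList = true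
                      · have h6' := h6
                        rw [startswith_eq', ssnL, chunk_structure] at h6'
                        obtain ⟨e0, e1'⟩ := prefix3_chunk c0 t 's' 's' 'n' h6'
                        obtain ⟨c2, c3, t₂, rfl, e2, e3⟩ := take2_map_eq t _ _ e1'
                        rw [if_pos h6, show ((c2 :: c3 :: t₂).drop 2) = t₂ from rfl]
                        rw [hasIdob] at hh
                        simp at hh
                        rw [isalpha_of_lowerChar_eq c2 's' (by decide) e2] at hh
                        rw [hasIdob] at hh
                        simp at hh
                        rw [isalpha_of_lowerChar_eq c3 'n' (by decide) e3] at hh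
                        exact ih t₂ true (by simp at hu; omega) hh
                      · rw [if_neg h6]
                        exact ih t true hlen hh
        · have hA' : PySem.Chars.isalpha c0 = false := bool_eq_false_of_not hA
          rw [chunk4_beq_false_of_not_alpha c0 t hA'] at hh
          simp at hh
          rw [hA'] at hh
          simp [hc0, hA']
          exact ih t false hlen hh

theorem A_toList (name : String) : (generate_display_name_py name).toList
    = R5 (pyTitleGo false (name.toList.map substChar)) := by
  unfold generate_display_name_py
  simp only [List.foldl]
  simp only [PySem.Str.toList_replace, String.toList_ofList]
  rw [replace_eq_repl _ _ _ (by decide), replace_eq_repl _ _ _ (by decide),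
      replace_eq_repl _ _ _ (by decide), replace_eq_repl _ _ _ (by decide),
      replace_eq_repl _ _ _ (by decide), replace_eq_repl _ _ _ (by decide)]
  rw [keyIdL, keyUrlL, keyApiL, keyDobL, keySsnL, underL, spaceL, IDL, URLL, APIL, DOBL, SSNL,
      repl_underscore]
  rfl

-- ===== VERDICT (by name: the statements are the Claim_ definitions above) =====
theorem generate_display_name_py_spec : Claim_unchanged_generate_display_name_py := by
  intro name _ hnd
  have haux : hasIdob false name.toList = false := by
    rw [← fold_eq_rec]
    exact bool_eq_false_of_not (fun hb => hnd hb)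
  apply str_eq_of_toList
  rw [A_toList, show (generate_display_name_py_alt name).toList = scanB false name.toList
    from by simp [generate_display_name_py_alt]]
  exact main_lemma (name.toList.length) name.toList false le_rfl haux

theorem generate_display_name_py_changed : Claim_changed_generate_display_name_py := by
  unfold Claim_changed_generate_display_name_py
  refine ⟨by decide, by decide,
    str_eq_of_toList _ _ (by decide),
    str_eq_of_toList _ _ (by simp [pvDiffWitness_generate_display_name_py, pvDiffWitnessOut_generate_display_name_py, generate_display_name_py_alt, scanB]; decide),
    fun h => absurd (congrArg String.toList h) (by decide)⟩

theorem generate_display_name_py_tight : Claim_exact_generate_display_name_py := by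
  intro name _ hd heq
  have hidob : hasIdob false name.toList = true := by
    rw [← fold_eq_rec]
    exact hd
  have hcnt := count_pos (name.toList.length) name.toList false le_rfl hidob
  have hlenEq : (generate_display_name_py name).toList.length
      = (generate_display_name_py_alt name).toList.length := by rw [heq]
  rw [A_toList, show (generate_display_name_py_alt name).toList = scanB false name.toList
    from by simp [generate_display_name_py_alt], len_lemma (name.toList.length) name.toList false le_rfl] at hlenEq
  omega
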